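-- pv_equiv track=rewrite | github.com/Sdas08217/LeetCode | Jun_2024/python/Jun_30.py | maxNumEdgesToRemove
-- ===== SOURCE A (Python) =====
-- class UnionFind:
--     def __init__(self, size):
--         self.parent = list(range(size))
--         self.rank = [1] * size
--
--     def find(self, u):
--         if self.parent[u] != u:
--             self.parent[u] = self.find(self.parent[u])
--         return self.parent[u]
--
--     def union(self, u, v):
--         root_u = self.find(u)
--         root_v = self.find(v)
--
--         if root_u != root_v:
--             if self.rank[root_u] > self.rank[root_v]:
--                 self.parent[root_v] = root_u
--             elif self.rank[root_u] < self.rank[root_v]: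
--                 self.parent[root_u] = root_v
--             else:
--                 self.parent[root_v] = root_u
--                 self.rank[root_u] += 1
--             return True
--         return False
--
-- def maxNumEdgesToRemove(n, edges):
--     """
--     :type n: int
--     :type edges: List[List[int]]
--     :rtype: int
--     """
--     uf_alice = UnionFind(n + 1)
--     uf_bob = UnionFind(n + 1)
--     uf_combined = UnionFind(n + 1)
--
--     redundant_edges = 0
--
--     # Step 1: Add all type 3 edges to both Alice's and Bob's graphs
--     for edge in edges:
--         if edge[0] == 3:
--             if not uf_combined.union(edge[1], edge[2]):
--                 redundant_edges += 1
--             else: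
--                 uf_alice.union(edge[1], edge[2])
--                 uf_bob.union(edge[1], edge[2])
--
--     # Step 2: Add type 1 edges to Alice's graph
--     for edge in edges:
--         if edge[0] == 1:
--             if not uf_alice.union(edge[1], edge[2]):
--                 redundant_edges += 1
--
--     # Step 3: Add type 2 edges to Bob's graph
--     for edge in edges:
--         if edge[0] == 2:
--             if not uf_bob.union(edge[1], edge[2]):
--                 redundant_edges += 1
--
--     # Check if both Alice and Bob can traverse the entire graph
--     if all(uf_alice.find(i) == uf_alice.find(1) for i in range(2, n + 1)) and all(uf_bob.find(i) == uf_bob.find(1) for i in range(2, n + 1)):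
--         return redundant_edges
--     else:
--         return -1
-- ===== SOURCE B (Python) =====
-- def maxNumEdgesToRemove(n, edges):
--     """Label-propagation re-implementation (no union-find): for each of the three
--     graphs (type-3, type-3+1, type-3+2) compute connected-component labels by
--     iterating min-label propagation to a fixpoint; obtain the redundant-edge
--     count from the counting formula  E_relevant - ((V - c3) + (c3 - cA) + (c3 - cB))
--     and decide connectivity by comparing labels."""
--     t1, t2, t3 = [], [], []
--     for e in edges:
--         if e[0] == 1:
--             t1.append((e[1], e[2]))
--         elif e[0] == 2:
--             t2.append((e[1], e[2]))
--         elif e[0] == 3: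
--             t3.append((e[1], e[2]))
--
--     def comp_labels(pairs):
--         lab = list(range(n + 1))
--         changed = True
--         while changed:
--             changed = False
--             for (u, v) in pairs:
--                 m = min(lab[u], lab[v])
--                 if lab[u] != m or lab[v] != m:
--                     lab[u] = m
--                     lab[v] = m
--                     changed = True
--         return lab
--
--     lab3 = comp_labels(t3)
--     labA = comp_labels(t3 + t1)
--     labB = comp_labels(t3 + t2)
--     c3 = len(set(lab3))
--     cA = len(set(labA))
--     cB = len(set(labB))
--     used = (len(lab3) - c3) + (c3 - cA) + (c3 - cB)
--     redundant = len(t1) + len(t2) + len(t3) - used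
--     if all(labA[i] == labA[1] for i in range(2, n + 1)) and all(labB[i] == labB[1] for i in range(2, n + 1)):
--         return redundant
--     return -1
-- ===== Notes on version B (the rewrite author's own statement) =====
-- stated objective: alternative
-- what changed: Replaces the incremental union-find solution by a non-incremental one: edges are first split into the three type lists, then for each of the three graphs (type-3, type-3+1, type-3+2) connected-component labels are computed from scratch by iterating min-label propagation over the edge list to a fixpoint; the redundant-edge count is obtained from the counting formula E_relevant - ((V - c3) + (c3 - cA) + (c3 - cB)) with component counts c = number of distinct labels, instead of incrementing a counter on each failed union, and connectivity is decided by comparing the computed labels.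
import Mathlib
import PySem

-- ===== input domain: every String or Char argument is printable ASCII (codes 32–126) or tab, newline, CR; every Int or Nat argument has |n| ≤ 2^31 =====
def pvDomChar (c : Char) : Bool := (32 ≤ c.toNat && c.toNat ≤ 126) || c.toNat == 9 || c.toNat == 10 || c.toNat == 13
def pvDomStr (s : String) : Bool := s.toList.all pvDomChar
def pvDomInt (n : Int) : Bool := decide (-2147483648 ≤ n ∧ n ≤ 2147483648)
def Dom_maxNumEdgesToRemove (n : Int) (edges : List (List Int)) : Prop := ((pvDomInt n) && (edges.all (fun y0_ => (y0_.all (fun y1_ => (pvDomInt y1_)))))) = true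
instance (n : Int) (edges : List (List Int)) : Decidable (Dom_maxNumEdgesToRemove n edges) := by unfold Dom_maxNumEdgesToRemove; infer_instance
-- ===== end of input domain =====

-- B abandons union-find entirely: it computes component labels per graph by
-- min-label propagation to a fixpoint and gets the redundant count from the
-- formula E - ((V - c3) + (c3 - cA) + (c3 - cB))  (alternative algorithm).

-- ===== PORT A =====
-- UnionFind.find with path compression; the Nat argument is pure fuel making the
-- Python recursion structural (fuel = array length always suffices on the forests
-- A builds, proved below); it returns the updated parent array and the root.
def ufFind (p : List Int) (u : Int) : Nat → List Int × Int
  | 0 => (p, u)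
  | fuel + 1 =>
      let pu := PySem.List.pyGetD p u 0
      if pu ≠ u then
        let res := ufFind p pu fuel
        (PySem.List.pySetD res.1 u res.2, res.2)
      else (p, u)

-- UnionFind.union (parent, rank, u, v) → (parent', rank', returned Bool)
def ufUnion (p rk : List Int) (u v : Int) : List Int × List Int × Bool :=
  let fu := ufFind p u p.length
  let fv := ufFind fu.1 v fu.1.length
  let ru := fu.2
  let rv := fv.2
  let p2 := fv.1
  if ru ≠ rv then
    if PySem.List.pyGetD rk ru 0 > PySem.List.pyGetD rk rv 0 then
      (PySem.List.pySetD p2 rv ru, rk, true)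
    else if PySem.List.pyGetD rk ru 0 < PySem.List.pyGetD rk rv 0 then
      (PySem.List.pySetD p2 ru rv, rk, true)
    else
      (PySem.List.pySetD p2 rv ru, PySem.List.pySetD rk ru (PySem.List.pyGetD rk ru 0 + 1), true)
  else (p2, rk, false)

-- Step 1 body: a type-3 edge goes into combined, and on success into alice and bob
def phase1Step (s : (List Int × List Int) × (List Int × List Int) × (List Int × List Int) × Int)
    (e : List Int) : (List Int × List Int) × (List Int × List Int) × (List Int × List Int) × Int :=
  if PySem.List.pyGetD e 0 0 = 3 then
    let c := ufUnion s.1.1 s.1.2 (PySem.List.pyGetD e 1 0) (PySem.List.pyGetD e 2 0)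
    if c.2.2 = false then ((c.1, c.2.1), s.2.1, s.2.2.1, s.2.2.2 + 1)
    else
      let a := ufUnion s.2.1.1 s.2.1.2 (PySem.List.pyGetD e 1 0) (PySem.List.pyGetD e 2 0)
      let b := ufUnion s.2.2.1.1 s.2.2.1.2 (PySem.List.pyGetD e 1 0) (PySem.List.pyGetD e 2 0)
      ((c.1, c.2.1), (a.1, a.2.1), (b.1, b.2.1), s.2.2.2)
  else s

-- Steps 2/3 body: a type-t edge into one union-find, counting failures
def typeStep (t : Int) (s : (List Int × List Int) × Int) (e : List Int) : (List Int × List Int) × Int :=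
  if PySem.List.pyGetD e 0 0 = t then
    let r := ufUnion s.1.1 s.1.2 (PySem.List.pyGetD e 1 0) (PySem.List.pyGetD e 2 0)
    if r.2.2 = false then ((r.1, r.2.1), s.2 + 1) else ((r.1, r.2.1), s.2)
  else s

-- all(uf.find(i) == uf.find(1) for i in range(2, n+1)): threads the mutated parent
-- array through the scan and short-circuits like Python's all()
def scanFind (p : List Int) : List Int → Bool
  | [] => true
  | i :: rest =>
      let fi := ufFind p i p.length
      let f1 := ufFind fi.1 1 fi.1.length
      if fi.2 = f1.2 then scanFind f1.1 rest else false

def maxNumEdgesToRemove (n : Int) (edges : List (List Int)) : Int :=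
  let p0 := PySem.List.pyRange 0 (n + 1) 1
  let r0 := List.replicate (n + 1).toNat (1 : Int)
  let s1 := edges.foldl phase1Step ((p0, r0), (p0, r0), (p0, r0), 0)
  let sa := edges.foldl (typeStep 1) (s1.2.1, s1.2.2.2)
  let sb := edges.foldl (typeStep 2) (s1.2.2.1, sa.2)
  if scanFind sa.1.1 (PySem.List.pyRange 2 (n + 1) 1) &&
     scanFind sb.1.1 (PySem.List.pyRange 2 (n + 1) 1) then sb.2 else -1

-- ===== PORT B =====
-- splitting loop: t1/t2/t3 collect the (u, v) pairs of each edge type, in order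
def bSplitStep (acc : List (Int × Int) × List (Int × Int) × List (Int × Int)) (e : List Int) :
    List (Int × Int) × List (Int × Int) × List (Int × Int) :=
  if PySem.List.pyGetD e 0 0 = 1 then
    (acc.1 ++ [(PySem.List.pyGetD e 1 0, PySem.List.pyGetD e 2 0)], acc.2.1, acc.2.2)
  else if PySem.List.pyGetD e 0 0 = 2 then
    (acc.1, acc.2.1 ++ [(PySem.List.pyGetD e 1 0, PySem.List.pyGetD e 2 0)], acc.2.2)
  else if PySem.List.pyGetD e 0 0 = 3 then
    (acc.1, acc.2.1, acc.2.2 ++ [(PySem.List.pyGetD e 1 0, PySem.List.pyGetD e 2 0)])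
  else acc

-- one edge of the inner 'for (u, v) in pairs' loop of comp_labels
def bPassStep (s : List Int × Bool) (p : Int × Int) : List Int × Bool :=
  let lu := PySem.List.pyGetD s.1 p.1 0
  let lv := PySem.List.pyGetD s.1 p.2 0
  let m := min lu lv
  if lu ≠ m ∨ lv ≠ m then (PySem.List.pySetD (PySem.List.pySetD s.1 p.1 m) p.2 m, true)
  else s

-- one full pass of the while-loop body (changed starts False)
def bPass (lab : List Int) (pairs : List (Int × Int)) : List Int × Bool :=
  pairs.foldl bPassStep (lab, false)

-- while changed: run passes until a pass reports no change; the fuel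
-- pvSumNat lab + 1 always suffices because every changing pass strictly
-- decreases the sum of the (nonnegative) labels (proved below the claim)
def pvSumNat (l : List Int) : Nat := (l.map Int.toNat).sum

def bLoopF : Nat → List (Int × Int) → List Int → List Int
  | 0, _, lab => lab
  | fuel + 1, pairs, lab =>
      if (bPass lab pairs).2 = true then bLoopF fuel pairs (bPass lab pairs).1
      else (bPass lab pairs).1

def bLoop (pairs : List (Int × Int)) (lab : List Int) : List Int :=
  bLoopF (pvSumNat lab + 1) pairs lab

def maxNumEdgesToRemove_alt (n : Int) (edges : List (List Int)) : Int :=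
  let ts := edges.foldl bSplitStep ([], [], [])
  let lab3 := bLoop ts.2.2 (PySem.List.pyRange 0 (n + 1) 1)
  let labA := bLoop (ts.2.2 ++ ts.1) (PySem.List.pyRange 0 (n + 1) 1)
  let labB := bLoop (ts.2.2 ++ ts.2.1) (PySem.List.pyRange 0 (n + 1) 1)
  let c3 := ((PySem.Set.ofList lab3).length : Int)
  let cA := ((PySem.Set.ofList labA).length : Int)
  let cB := ((PySem.Set.ofList labB).length : Int)
  let used := ((lab3.length : Int) - c3) + (c3 - cA) + (c3 - cB)
  let redundant := (ts.1.length : Int) + (ts.2.1.length : Int) + (ts.2.2.length : Int) - used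
  if ((PySem.List.pyRange 2 (n + 1) 1).all fun i =>
        PySem.List.pyGetD labA i 0 == PySem.List.pyGetD labA 1 0) &&
     ((PySem.List.pyRange 2 (n + 1) 1).all fun i =>
        PySem.List.pyGetD labB i 0 == PySem.List.pyGetD labB 1 0) then redundant else -1

-- ===== PRECONDITION & SPEC =====
-- Pre_ excludes exactly the inputs where the programs raise: an empty edge (both
-- raise IndexError on edge[0]), and a relevant (type-1/2/3) edge shorter than 3
-- or with an endpoint outside -(n+1)..n (both raise IndexError; endpoints in
-- -(n+1)..-1 are Python's negative-index wraparound, covered by the claim).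
def Pre_maxNumEdgesToRemove (n : Int) (edges : List (List Int)) : Prop :=
  ∀ e ∈ edges, e ≠ [] ∧
    ((PySem.List.pyGetD e 0 0 = 1 ∨ PySem.List.pyGetD e 0 0 = 2 ∨ PySem.List.pyGetD e 0 0 = 3) →
      3 ≤ e.length ∧
      -(n + 1) ≤ PySem.List.pyGetD e 1 0 ∧ PySem.List.pyGetD e 1 0 ≤ n ∧
      -(n + 1) ≤ PySem.List.pyGetD e 2 0 ∧ PySem.List.pyGetD e 2 0 ≤ n)
instance (n : Int) (edges : List (List Int)) : Decidable (Pre_maxNumEdgesToRemove n edges) := by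
  unfold Pre_maxNumEdgesToRemove; infer_instance

def pvWitness_maxNumEdgesToRemove : Int × List (List Int) :=
  (3, [[3, 1, 2], [1, 1, 3], [2, 1, 3], [1, 2, 3]])

def Spec_maxNumEdgesToRemove (n : Int) (edges : List (List Int)) (out : Int) : Prop := out = maxNumEdgesToRemove_alt n edges
instance (n : Int) (edges : List (List Int)) (out : Int) : Decidable (Spec_maxNumEdgesToRemove n edges out) := by unfold Spec_maxNumEdgesToRemove; infer_instance

-- ===== CLAIM (what is proved, stated in full; the proofs are below) =====
def Claim_equal_maxNumEdgesToRemove : Prop := ∀ (n : Int) (edges : List (List Int)), Dom_maxNumEdgesToRemove n edges → Pre_maxNumEdgesToRemove n edges → Spec_maxNumEdgesToRemove n edges (maxNumEdgesToRemove n edges)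

-- ===== LEMMAS AND PROOFS =====

-- ---- A-side union-find machinery ----
def pvPget (p : List Int) (i : Nat) : Nat := (p.getD i 0).toNat

def pvInvH (N : Nat) (p : List Int) (h : Nat → Nat) : Prop :=
  ∀ i, i < N → pvPget p i ≠ i → h (pvPget p i) < h i

def pvInv (N : Nat) (p : List Int) : Prop :=
  p.length = N ∧ (∀ i, i < N → 0 ≤ p.getD i 0 ∧ p.getD i 0 < (N : Int)) ∧ ∃ h, pvInvH N p h

def pvRoot (p : List Int) (i : Nat) : Nat := (pvPget p)^[p.length] i

lemma pget_lt {N p} (hI : pvInv N p) {i : Nat} (hi : i < N) : pvPget p i < N := by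
  obtain ⟨-, hb, -⟩ := hI
  have := hb i hi
  unfold pvPget
  omega

lemma iterate_lt {N p} (hI : pvInv N p) {i : Nat} (hi : i < N) (k : Nat) :
    (pvPget p)^[k] i < N := by
  induction k generalizing i with
  | zero => simpa
  | succ k ih =>
      rw [Function.iterate_succ_apply]
      exact ih (pget_lt hI hi)

lemma exists_fix {N p} (hI : pvInv N p) {i : Nat} (hi : i < N) :
    ∃ k, k < N ∧ pvPget p ((pvPget p)^[k] i) = (pvPget p)^[k] i := by
  by_contra hno
  push Not at hno
  obtain ⟨h, hh⟩ := hI.2.2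
  set g : Nat → Nat := fun k => (pvPget p)^[k] i with hg
  have hglt : ∀ k, g k < N := fun k => iterate_lt hI hi k
  have hstep : ∀ k, k < N → h (g (k + 1)) < h (g k) := by
    intro k hk
    have hne := hno k hk
    have : g (k + 1) = pvPget p (g k) := by
      simp [hg, Function.iterate_succ_apply']
    rw [this]
    exact hh (g k) (hglt k) hne
  have hmono : ∀ l k, k < l → l ≤ N → h (g l) < h (g k) := by
    intro l
    induction l with
    | zero => omega
    | succ l ih =>
        intro k hk hl
        have h1 : h (g (l + 1)) < h (g l) := hstep l (by omega)
        rcases Nat.lt_or_ge k l with hkl | hkl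
        · exact lt_trans h1 (ih k hkl (by omega))
        · have : k = l := by omega
          subst this; exact h1
  have hinj : Set.InjOn g ↑(Finset.range (N + 1)) := by
    intro a ha b hb hab
    simp at ha hb
    by_contra hne
    rcases Nat.lt_or_ge a b with hlt | hge
    · have := hmono b a hlt (by omega); rw [hab] at this; omega
    · have : b < a := by omega
      have := hmono a b this (by omega); rw [hab] at this; omega
  have hmaps : ∀ a ∈ Finset.range (N + 1), g a ∈ Finset.range N := by
    intro a _; simp [Finset.mem_range, hglt a]
  have := Finset.card_le_card_of_injOn g hmaps hinj
  simp at this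

lemma root_fix {N p} (hI : pvInv N p) {i : Nat} (hi : i < N) :
    pvPget p (pvRoot p i) = pvRoot p i := by
  obtain ⟨k, hk, hfix⟩ := exists_fix hI hi
  have hlen : p.length = N := hI.1
  have : pvRoot p i = (pvPget p)^[k] i := by
    unfold pvRoot
    rw [hlen, show N = (N - k) + k by omega, Function.iterate_add_apply]
    exact Function.iterate_fixed hfix (N - k)
  rw [this]; exact hfix

lemma root_lt {N p} (hI : pvInv N p) {i : Nat} (hi : i < N) : pvRoot p i < N :=
  iterate_lt hI hi p.length

lemma root_eq_self_of_fix {p} {i : Nat} (hfix : pvPget p i = i) : pvRoot p i = i :=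
  Function.iterate_fixed hfix p.length

lemma root_pget {N p} (hI : pvInv N p) {i : Nat} (hi : i < N) :
    pvRoot p (pvPget p i) = pvRoot p i := by
  have h1 : pvRoot p (pvPget p i) = (pvPget p)^[p.length + 1] i :=
    (Function.iterate_succ_apply (pvPget p) p.length i).symm
  have h2 : (pvPget p)^[p.length + 1] i = pvPget p (pvRoot p i) :=
    Function.iterate_succ_apply' (pvPget p) p.length i
  rw [h1, h2, root_fix hI hi]

lemma pget_set {p : List Int} {j : Nat} (hj : j < p.length) (r : Nat) (i : Nat) :
    pvPget (p.set j (r : Int)) i = if i = j then r else pvPget p i := by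
  unfold pvPget
  by_cases hij : i = j
  · subst hij
    simp [List.getD, List.getElem?_set_self (by omega)]
  · simp [List.getD, List.getElem?_set_ne (by omega : j ≠ i), hij]

lemma set_self_eq {p : List Int} {j : Nat} (hj : j < p.length)
    (hv : p.getD j 0 = ((j : Nat) : Int)) : p.set j (j : Int) = p := by
  apply List.ext_getElem (by simp)
  intro k hk hk'
  by_cases hkj : k = j
  · subst hkj
    rw [List.getElem_set_self]
    have hgg : p.getD k 0 = p[k] := by
      rw [List.getD_eq_getElem?_getD, List.getElem?_eq_getElem hk']; rfl
    rw [← hgg, hv]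
  · simp [List.getElem_set_ne (by omega : j ≠ k)]

lemma pvRoot_set {N : Nat} {p : List Int} {j r : Nat} (hI : pvInv N p)
    (hj : j < N) (hr : r < N) (hfix : pvPget p r = r)
    (hcase : r = pvRoot p j ∨ pvPget p j = j) :
    pvInv N (p.set j (r : Int)) ∧
      ∀ w, w < N → pvRoot (p.set j (r : Int)) w =
        if pvRoot p w = pvRoot p j then r else pvRoot p w := by
  have hlen : p.length = N := hI.1
  by_cases hrj : r = j
  · have hfixj : pvPget p j = j := by
      rcases hcase with hc | hc
      · rw [hrj] at hfix; exact hfix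
      · exact hc
    have hv : p.getD j 0 = ((j : Nat) : Int) := by
      have hb := (hI.2.1 j hj).1
      unfold pvPget at hfixj
      omega
    have hpp : p.set j ((r : Nat) : Int) = p := by
      rw [hrj]; exact set_self_eq (by omega) hv
    rw [hpp]
    refine ⟨hI, fun w hw => ?_⟩
    by_cases hc : pvRoot p w = pvRoot p j
    · rw [if_pos hc, hc, root_eq_self_of_fix hfixj]; exact hrj.symm
    · rw [if_neg hc]
  · set p' := p.set j (r : Int) with hp'
    have hlen' : p'.length = N := by simp [hp', hlen]
    have hpg' : ∀ i, pvPget p' i = if i = j then r else pvPget p i := by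
      intro i; exact pget_set (by omega) r i
    obtain ⟨h, hh⟩ := hI.2.2
    have hI' : pvInv N p' := by
      refine ⟨hlen', ?_, ?_⟩
      · intro i hi
        by_cases hij : i = j
        · subst hij
          have : p'.getD i 0 = (r : Int) := by
            simp [hp', List.getD, List.getElem?_set_self (by omega : i < p.length)]
          rw [this]; constructor <;> omega
        · have : p'.getD i 0 = p.getD i 0 := by
            simp [hp', List.getD, List.getElem?_set_ne (by omega : j ≠ i)]
          rw [this]; exact hI.2.1 i hi
      · refine ⟨fun x => if x = r then 0 else h x + 1, ?_⟩
        intro i hi hne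
        rw [hpg'] at hne ⊢
        by_cases hij : i = j
        · subst hij
          simp only [reduceIte] at hne ⊢
          have : i ≠ r := fun hc => hrj (hc ▸ rfl)
          simp [if_neg this]
        · simp only [if_neg hij] at hne ⊢
          have hir : i ≠ r := by
            intro hc; subst hc; exact hne hfix
          by_cases hpr : pvPget p i = r
          · simp [hpr, hir]
          · have := hh i hi hne
            simp [hpr, hir]; omega
    have hfix' : pvPget p' r = r := by rw [hpg', if_neg hrj]; exact hfix
    have hroot'r : pvRoot p' r = r := root_eq_self_of_fix hfix'
    have hrootj' : pvRoot p' j = r := by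
      have : pvPget p' j = r := by rw [hpg', if_pos rfl]
      calc pvRoot p' j = pvRoot p' (pvPget p' j) := (root_pget hI' hj).symm
        _ = r := by rw [this, hroot'r]
    refine ⟨hI', ?_⟩
    have main : ∀ m w, w < N → h w = m →
        pvRoot p' w = if pvRoot p w = pvRoot p j then r else pvRoot p w := by
      intro m
      induction m using Nat.strong_induction_on with
      | _ m ih =>
        intro w hw hm
        by_cases hfw : pvPget p w = w
        · have hrw : pvRoot p w = w := root_eq_self_of_fix hfw
          by_cases hwj : w = j
          · subst hwj
            rw [hrootj', hrw, if_pos rfl]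
          · have : pvPget p' w = w := by rw [hpg', if_neg hwj]; exact hfw
            rw [root_eq_self_of_fix this, hrw]
            rcases hcase with hc | hc
            · by_cases hcc : w = pvRoot p j
              · rw [if_pos hcc]; exact (hc.trans hcc.symm).symm
              · rw [if_neg hcc]
            · have hrj' : pvRoot p j = j := root_eq_self_of_fix hc
              rw [hrj', if_neg hwj]
        · by_cases hwj : w = j
          · subst hwj
            rcases hcase with hc | hc
            · rw [hrootj', if_pos rfl]
            · exact absurd hc hfw
          · have ht : pvPget p' w = pvPget p w := by rw [hpg', if_neg hwj]
            have htlt : pvPget p w < N := pget_lt hI hw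
            have hhm := hh w hw hfw
            have := ih (h (pvPget p w)) (by omega) (pvPget p w) htlt rfl
            calc pvRoot p' w = pvRoot p' (pvPget p' w) := (root_pget hI' hw).symm
              _ = pvRoot p' (pvPget p w) := by rw [ht]
              _ = if pvRoot p (pvPget p w) = pvRoot p j then r else pvRoot p (pvPget p w) := this
              _ = if pvRoot p w = pvRoot p j then r else pvRoot p w := by
                  rw [root_pget hI hw]
    intro w hw; exact main (h w) w hw rfl

lemma pget_cast {N p} (hI : pvInv N p) {u : Nat} (hu : u < N) :
    PySem.List.pyGetD p (u : Int) 0 = ((pvPget p u : Nat) : Int) := by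
  rw [PySem.List.pyGetD_natCast]
  have := (hI.2.1 u hu).1
  unfold pvPget
  omega

lemma ufFind_spec {N : Nat} : ∀ (fuel : Nat) (p : List Int) (u : Nat), pvInv N p → u < N →
    (∃ k, k < fuel ∧ pvPget p ((pvPget p)^[k] u) = (pvPget p)^[k] u) →
    (ufFind p (u : Int) fuel).2 = ((pvRoot p u : Nat) : Int) ∧
    pvInv N (ufFind p (u : Int) fuel).1 ∧
    ∀ w, w < N → pvRoot (ufFind p (u : Int) fuel).1 w = pvRoot p w := by
  intro fuel
  induction fuel with
  | zero => intro p u _ _ hk; obtain ⟨k, hk, -⟩ := hk; omega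
  | succ fuel ih =>
      intro p u hI hu hk
      by_cases hfx : pvPget p u = u
      · have hstep : ufFind p (u : Int) (fuel + 1) = (p, (u : Int)) := by
          simp only [ufFind]
          rw [pget_cast hI hu, hfx]
          simp
        rw [hstep]
        exact ⟨by rw [root_eq_self_of_fix hfx], hI, fun w _ => rfl⟩
      · set t := pvPget p u with hts
        have ht : t < N := pget_lt hI hu
        have hkt : ∃ k, k < fuel ∧ pvPget p ((pvPget p)^[k] t) = (pvPget p)^[k] t := by
          obtain ⟨k, hk1, hk2⟩ := hk
          match k, hk1, hk2 with
          | 0, _, hk2 => exact absurd hk2 hfx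
          | k' + 1, hk1, hk2 =>
              refine ⟨k', by omega, ?_⟩
              rw [Function.iterate_succ_apply] at hk2
              exact hk2
        obtain ⟨hres2, hresI, hresR⟩ := ih p t hI ht hkt
        have hstep : ufFind p (u : Int) (fuel + 1) =
            ((ufFind p (t : Int) fuel).1.set u (ufFind p (t : Int) fuel).2,
             (ufFind p (t : Int) fuel).2) := by
          simp only [ufFind]
          rw [pget_cast hI hu]
          rw [if_pos (show ((pvPget p u : Nat) : Int) ≠ (u : Int) by exact_mod_cast hfx),
            PySem.List.pySetD_natCast]
        set p1 := (ufFind p (t : Int) fuel).1 with hp1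
        have hrtu : pvRoot p t = pvRoot p u := root_pget hI hu
        have hset : p1.set u (ufFind p (t : Int) fuel).2 =
            p1.set u ((pvRoot p t : Nat) : Int) := by
          rw [hres2]
        have hfix1 : pvPget p1 (pvRoot p t) = pvRoot p t := by
          have h1 : pvRoot p1 u = pvRoot p u := hresR u hu
          have := root_fix hresI hu
          rw [h1, ← hrtu] at this
          exact this
        have hrs := pvRoot_set (r := pvRoot p t) (j := u) hresI hu (root_lt hI ht) hfix1
          (Or.inl (by rw [hresR u hu, hrtu]))
        rw [hstep, hset]
        refine ⟨by simpa [hrtu] using hres2, hrs.1, fun w hw => ?_⟩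
        rw [hrs.2 w hw]
        by_cases hc : pvRoot p1 w = pvRoot p1 u
        · rw [if_pos hc, hrtu, ← hresR u hu, ← hc, hresR w hw]
        · rw [if_neg hc, hresR w hw]

lemma ufFind_run {N : Nat} {p : List Int} {u : Nat} (hI : pvInv N p) (hu : u < N) :
    (ufFind p (u : Int) p.length).2 = ((pvRoot p u : Nat) : Int) ∧
    pvInv N (ufFind p (u : Int) p.length).1 ∧
    ∀ w, w < N → pvRoot (ufFind p (u : Int) p.length).1 w = pvRoot p w := by
  apply ufFind_spec p.length p u hI hu
  obtain ⟨k, hk, hfx⟩ := exists_fix hI hu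
  exact ⟨k, by rw [hI.1]; omega, hfx⟩

lemma ufUnion_spec {N : Nat} {p : List Int} (rk : List Int) {u v : Nat}
    (hI : pvInv N p) (hu : u < N) (hv : v < N) :
    pvInv N (ufUnion p rk (u : Int) (v : Int)).1 ∧
    ((ufUnion p rk (u : Int) (v : Int)).2.2 = true ↔ pvRoot p u ≠ pvRoot p v) ∧
    (pvRoot p u = pvRoot p v →
      ∀ w, w < N → pvRoot (ufUnion p rk (u : Int) (v : Int)).1 w = pvRoot p w) ∧
    (pvRoot p u ≠ pvRoot p v → ∃ R, (R = pvRoot p u ∨ R = pvRoot p v) ∧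
      ∀ w, w < N → pvRoot (ufUnion p rk (u : Int) (v : Int)).1 w =
        if pvRoot p w = pvRoot p u ∨ pvRoot p w = pvRoot p v then R else pvRoot p w) := by
  obtain ⟨hu2, huI, huR⟩ := ufFind_run (p := p) hI hu
  set p1 := (ufFind p (u : Int) p.length).1 with hp1
  obtain ⟨hv2, hvI, hvR⟩ := ufFind_run (p := p1) huI hv
  set p2 := (ufFind p1 (v : Int) p1.length).1 with hp2
  have hruN : pvRoot p u < N := root_lt hI hu
  have hrvN : pvRoot p v < N := root_lt hI hv
  have hv2' : (ufFind p1 (v : Int) p1.length).2 = ((pvRoot p v : Nat) : Int) := by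
    rw [hv2, huR v hv]
  have hR2 : ∀ w, w < N → pvRoot p2 w = pvRoot p w := fun w hw => by
    rw [hvR w hw, huR w hw]
  have hI2 : pvInv N p2 := hvI
  have hfxu : pvPget p2 (pvRoot p u) = pvRoot p u := by
    have := root_fix hI2 hu
    rw [hR2 u hu] at this
    exact this
  have hfxv : pvPget p2 (pvRoot p v) = pvRoot p v := by
    have := root_fix hI2 hv
    rw [hR2 v hv] at this
    exact this
  have hunf : ufUnion p rk (u : Int) (v : Int) =
      (if ((pvRoot p u : Nat) : Int) ≠ ((pvRoot p v : Nat) : Int) then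
        if PySem.List.pyGetD rk ((pvRoot p u : Nat) : Int) 0 > PySem.List.pyGetD rk ((pvRoot p v : Nat) : Int) 0 then
          (PySem.List.pySetD p2 ((pvRoot p v : Nat) : Int) ((pvRoot p u : Nat) : Int), rk, true)
        else if PySem.List.pyGetD rk ((pvRoot p u : Nat) : Int) 0 < PySem.List.pyGetD rk ((pvRoot p v : Nat) : Int) 0 then
          (PySem.List.pySetD p2 ((pvRoot p u : Nat) : Int) ((pvRoot p v : Nat) : Int), rk, true)
        else
          (PySem.List.pySetD p2 ((pvRoot p v : Nat) : Int) ((pvRoot p u : Nat) : Int),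
           PySem.List.pySetD rk ((pvRoot p u : Nat) : Int) (PySem.List.pyGetD rk ((pvRoot p u : Nat) : Int) 0 + 1), true)
      else (p2, rk, false)) := by
    simp only [ufUnion]
    rw [hu2, hv2', ← hp1, ← hp2]
  by_cases hrr : pvRoot p u = pvRoot p v
  · have hc : ¬ (((pvRoot p u : Nat) : Int) ≠ ((pvRoot p v : Nat) : Int)) := by
      simp [hrr]
    rw [hunf, if_neg hc]
    refine ⟨hI2, by simp [hrr], fun _ w hw => hR2 w hw, fun hcon => absurd hrr hcon⟩
  · have hc : ((pvRoot p u : Nat) : Int) ≠ ((pvRoot p v : Nat) : Int) := by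
      exact_mod_cast hrr
    have hgen : ∀ (j r : Nat), j < N → r < N → pvPget p2 j = j → pvPget p2 r = r →
        (j = pvRoot p u ∧ r = pvRoot p v) ∨ (j = pvRoot p v ∧ r = pvRoot p u) →
        pvInv N (p2.set j (r : Int)) ∧
        ∀ w, w < N → pvRoot (p2.set j (r : Int)) w =
          if pvRoot p w = pvRoot p u ∨ pvRoot p w = pvRoot p v then r else pvRoot p w := by
      intro j r hj hr hfj hfr hor
      have hrs := pvRoot_set (j := j) (r := r) hI2 hj hr hfr (Or.inr hfj)
      refine ⟨hrs.1, fun w hw => ?_⟩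
      rw [hrs.2 w hw]
      have hrj : pvRoot p2 j = j := root_eq_self_of_fix hfj
      have hrr2 : pvRoot p2 r = r := root_eq_self_of_fix hfr
      have hw2 : pvRoot p2 w = pvRoot p w := hR2 w hw
      rcases hor with ⟨hju, hrv⟩ | ⟨hjv, hru⟩
      · subst hju hrv
        rw [hrj, hw2]
        by_cases h1 : pvRoot p w = pvRoot p u
        · rw [if_pos h1, if_pos (Or.inl h1)]
        · rw [if_neg h1]
          by_cases h2 : pvRoot p w = pvRoot p v
          · rw [if_pos (Or.inr h2), h2]
          · rw [if_neg (by tauto)]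
      · subst hjv hru
        rw [hrj, hw2]
        by_cases h2 : pvRoot p w = pvRoot p v
        · rw [if_pos h2, if_pos (Or.inr h2)]
        · rw [if_neg h2]
          by_cases h1 : pvRoot p w = pvRoot p u
          · rw [if_pos (Or.inl h1), h1]
          · rw [if_neg (by tauto)]
    rw [hunf, if_pos hc]
    by_cases hb1 : PySem.List.pyGetD rk ((pvRoot p u : Nat) : Int) 0 > PySem.List.pyGetD rk ((pvRoot p v : Nat) : Int) 0
    · rw [if_pos hb1]
      have hset : PySem.List.pySetD p2 ((pvRoot p v : Nat) : Int) ((pvRoot p u : Nat) : Int) =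
          p2.set (pvRoot p v) ((pvRoot p u : Nat) : Int) := PySem.List.pySetD_natCast ..
      rw [hset]
      have hg := hgen (pvRoot p v) (pvRoot p u) hrvN hruN hfxv hfxu (Or.inr ⟨rfl, rfl⟩)
      exact ⟨hg.1, by simp [hrr], fun hcon => absurd hcon hrr, fun _ =>
        ⟨pvRoot p u, Or.inl rfl, hg.2⟩⟩
    · rw [if_neg hb1]
      by_cases hb2 : PySem.List.pyGetD rk ((pvRoot p u : Nat) : Int) 0 < PySem.List.pyGetD rk ((pvRoot p v : Nat) : Int) 0
      · rw [if_pos hb2]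
        have hset : PySem.List.pySetD p2 ((pvRoot p u : Nat) : Int) ((pvRoot p v : Nat) : Int) =
            p2.set (pvRoot p u) ((pvRoot p v : Nat) : Int) := PySem.List.pySetD_natCast ..
        rw [hset]
        have hg := hgen (pvRoot p u) (pvRoot p v) hruN hrvN hfxu hfxv (Or.inl ⟨rfl, rfl⟩)
        exact ⟨hg.1, by simp [hrr], fun hcon => absurd hcon hrr, fun _ =>
          ⟨pvRoot p v, Or.inr rfl, hg.2⟩⟩
      · rw [if_neg hb2]
        have hset : PySem.List.pySetD p2 ((pvRoot p v : Nat) : Int) ((pvRoot p u : Nat) : Int) =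
            p2.set (pvRoot p v) ((pvRoot p u : Nat) : Int) := PySem.List.pySetD_natCast ..
        rw [hset]
        have hg := hgen (pvRoot p v) (pvRoot p u) hrvN hruN hfxv hfxu (Or.inr ⟨rfl, rfl⟩)
        exact ⟨hg.1, by simp [hrr], fun hcon => absurd hcon hrr, fun _ =>
          ⟨pvRoot p u, Or.inl rfl, hg.2⟩⟩

lemma scan_spec {N : Nat} (h1 : 1 < N) :
    ∀ (is : List Int) (p : List Int), pvInv N p → (∀ i ∈ is, 0 ≤ i ∧ i < (N : Int)) →
    (scanFind p is = true ↔ ∀ i ∈ is, pvRoot p i.toNat = pvRoot p 1) := by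
  intro is
  induction is with
  | nil => intro p _ _; simp [scanFind]
  | cons i rest ih =>
      intro p hI hb
      obtain ⟨hi0, hiN⟩ := hb i List.mem_cons_self
      have hiN' : i.toNat < N := by omega
      have hcast : (i.toNat : Int) = i := by omega
      obtain ⟨hf2, hfI, hfR⟩ := ufFind_run (p := p) hI hiN'
      rw [hcast] at hf2 hfI hfR
      set p1 := (ufFind p i p.length).1 with hp1
      obtain ⟨hg2, hgI, hgR⟩ := ufFind_run (p := p1) hfI h1
      have hone : ((1 : Nat) : Int) = (1 : Int) := rfl
      rw [hone] at hg2 hgI hgR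
      set p2 := (ufFind p1 1 p1.length).1 with hp2
      have hstep : scanFind p (i :: rest) =
          (if (ufFind p i p.length).2 = (ufFind p1 1 p1.length).2 then scanFind p2 rest
           else false) := rfl
      rw [hstep, hf2, hg2]
      have hr1 : pvRoot p1 1 = pvRoot p 1 := hfR 1 h1
      by_cases heq : pvRoot p i.toNat = pvRoot p 1
      · rw [if_pos (by rw [heq, hr1])]
        rw [ih p2 hgI (fun j hj => hb j (List.mem_cons_of_mem i hj))]
        constructor
        · intro hall j hj
          rcases List.mem_cons.1 hj with hji | hjr
          · rw [hji]; exact heq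
          · have hjN : j.toNat < N := by
              obtain ⟨hj0, hjN⟩ := hb j hj; omega
            have := hall j hjr
            rwa [hgR j.toNat hjN, hfR j.toNat hjN, hgR 1 h1, hr1] at this
        · intro hall j hj
          have hjN : j.toNat < N := by
            obtain ⟨hj0, hjN⟩ := hb j (List.mem_cons_of_mem i hj); omega
          rw [hgR j.toNat hjN, hfR j.toNat hjN, hgR 1 h1, hr1]
          exact hall j (List.mem_cons_of_mem i hj)
      · rw [if_neg (by rw [hr1]; exact_mod_cast fun hc => heq (by exact_mod_cast hc))]
        simp only [Bool.false_eq_true, false_iff]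
        intro hall
        exact heq (hall i List.mem_cons_self)

lemma init_parent {n : Int} (hn : 0 ≤ n) :
    pvInv ((n + 1).toNat) (PySem.List.pyRange 0 (n + 1) 1) ∧
    ∀ i : Nat, i < (n + 1).toNat → pvRoot (PySem.List.pyRange 0 (n + 1) 1) i = i := by
  set N := (n + 1).toNat with hNd
  set p0 := PySem.List.pyRange 0 (n + 1) 1 with hp0
  have hlen : p0.length = N := by
    rw [hp0, PySem.List.length_pyRange_one]; omega
  have hget : ∀ i : Nat, i < N → p0.getD i 0 = (i : Int) := by
    intro i hi
    have hilen : i < p0.length := by omega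
    have h1 : p0.getD i 0 = p0[i] := by
      rw [List.getD_eq_getElem?_getD, List.getElem?_eq_getElem hilen]; rfl
    have h2 : p0[i] = (0 : Int) + i := PySem.List.getElem_pyRange_one 0 (n + 1) i
      (by rw [PySem.List.length_pyRange_one]; omega)
    rw [h1, h2]
    simp
  have hpg : ∀ i : Nat, i < N → pvPget p0 i = i := by
    intro i hi
    unfold pvPget; rw [hget i hi]; omega
  refine ⟨⟨hlen, fun i hi => by rw [hget i hi]; constructor <;> omega,
    ⟨fun _ => 0, fun i hi hne => absurd (hpg i hi) hne⟩⟩, fun i hi => ?_⟩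
  exact Function.iterate_fixed (hpg i hi) p0.length

lemma foldl_id {α β : Type} (f : α → β → α) (es : List β) (s : α)
    (h : ∀ e ∈ es, ∀ s, f s e = s) : es.foldl f s = s := by
  induction es generalizing s with
  | nil => rfl
  | cons e es ih =>
      rw [List.foldl_cons, h e List.mem_cons_self]
      exact ih _ (fun e' he' s' => h e' (List.mem_cons_of_mem e he') s')


-- ---- termination of the propagation loop ----
lemma pyIdx?_lt {n : Nat} {i : Int} {j : Nat} (h : PySem.List.pyIdx? n i = some j) : j < n := by
  unfold PySem.List.pyIdx? at h
  split_ifs at h <;> simp_all <;> omega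

lemma pvGet_none {α : Type} (xs : List α) (i : Int) (d : α)
    (h : PySem.List.pyIdx? xs.length i = none) : PySem.List.pyGetD xs i d = d := by
  simp [PySem.List.pyGetD, PySem.List.pyGet?, h]

lemma pvGet_some {α : Type} (xs : List α) (i : Int) (d : α) {j : Nat}
    (h : PySem.List.pyIdx? xs.length i = some j) : PySem.List.pyGetD xs i d = xs.getD j d := by
  simp [PySem.List.pyGetD, PySem.List.pyGet?, h, List.getD_eq_getElem?_getD]

lemma pvSet_none {α : Type} (xs : List α) (i : Int) (v : α)
    (h : PySem.List.pyIdx? xs.length i = none) : PySem.List.pySetD xs i v = xs := by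
  simp [PySem.List.pySetD, PySem.List.pySet?, h]

lemma pvSet_some {α : Type} (xs : List α) (i : Int) (v : α) {j : Nat}
    (h : PySem.List.pyIdx? xs.length i = some j) : PySem.List.pySetD xs i v = xs.set j v := by
  simp [PySem.List.pySetD, PySem.List.pySet?, h]

lemma sum_set_nat (l : List Nat) (j : Nat) (a : Nat) (hj : j < l.length) :
    (l.set j a).sum + l[j] = l.sum + a := by
  induction l generalizing j with
  | nil => simp at hj
  | cons x xs ih =>
      cases j with
      | zero => simp [List.set]; omega
      | succ k =>
          simp only [List.set, List.sum_cons, List.getElem_cons_succ]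
          have := ih k (by simpa using hj)
          omega

lemma pvSumNat_set (l : List Int) (j : Nat) (a : Int) (hj : j < l.length) :
    pvSumNat (l.set j a) + l[j].toNat = pvSumNat l + a.toNat := by
  unfold pvSumNat
  rw [List.map_set]
  have := sum_set_nat (l.map Int.toNat) j a.toNat (by simpa using hj)
  simpa using this

lemma nonneg_set {l : List Int} {j : Nat} {a : Int} (h : ∀ x ∈ l, 0 ≤ x) (ha : 0 ≤ a) :
    ∀ x ∈ l.set j a, 0 ≤ x := by
  intro x hx
  rcases List.mem_or_eq_of_mem_set hx with h1 | h1
  · exact h x h1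
  · omega


lemma bPassStep_facts (l : List Int) (b : Bool) (p : Int × Int) (h : ∀ x ∈ l, 0 ≤ x) :
    (∀ x ∈ (bPassStep (l, b) p).1, 0 ≤ x) ∧
    pvSumNat (bPassStep (l, b) p).1 ≤ pvSumNat l ∧
    ((bPassStep (l, b) p).2 = true → b = true ∨ pvSumNat (bPassStep (l, b) p).1 < pvSumNat l) := by
  unfold bPassStep
  set lu := PySem.List.pyGetD l p.1 0 with hlu
  set lv := PySem.List.pyGetD l p.2 0 with hlv
  set m := min lu lv with hm
  by_cases hcond : lu ≠ m ∨ lv ≠ m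
  · rw [if_pos hcond]
    dsimp only
    have hlu0 : 0 ≤ lu := by
      cases h1 : PySem.List.pyIdx? l.length p.1 with
      | none => rw [hlu, pvGet_none l p.1 0 h1]
      | some j =>
          have hj := pyIdx?_lt h1
          rw [hlu, pvGet_some l p.1 0 h1, List.getD_eq_getElem _ _ hj]
          exact h _ (List.getElem_mem hj)
    have hlv0 : 0 ≤ lv := by
      cases h1 : PySem.List.pyIdx? l.length p.2 with
      | none => rw [hlv, pvGet_none l p.2 0 h1]
      | some j =>
          have hj := pyIdx?_lt h1
          rw [hlv, pvGet_some l p.2 0 h1, List.getD_eq_getElem _ _ hj]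
          exact h _ (List.getElem_mem hj)
    have hm0 : 0 ≤ m := le_min hlu0 hlv0
    have hmlu : m ≤ lu := min_le_left _ _
    have hmlv : m ≤ lv := min_le_right _ _
    cases h1 : PySem.List.pyIdx? l.length p.1 with
    | none =>
        have hlu' : lu = 0 := by rw [hlu, pvGet_none l p.1 0 h1]
        have hm' : m = 0 := by omega
        rw [pvSet_none l p.1 m h1]
        cases h2 : PySem.List.pyIdx? l.length p.2 with
        | none =>
            exfalso
            have hlv' : lv = 0 := by rw [hlv, pvGet_none l p.2 0 h2]
            rcases hcond with hc | hc
            · exact hc (by omega)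
            · exact hc (by omega)
        | some j2 =>
            have hj2 := pyIdx?_lt h2
            have hlv' : lv = l[j2] := by
              rw [hlv, pvGet_some l p.2 0 h2, List.getD_eq_getElem _ _ hj2]
            have hlvm : lv ≠ m := by
              rcases hcond with hc | hc
              · exact ((hc (by omega)).elim)
              · exact hc
            rw [pvSet_some l p.2 m h2]
            have hsum := pvSumNat_set l j2 m hj2
            refine ⟨nonneg_set h hm0, by omega, fun _ => Or.inr (by omega)⟩
    | some j1 =>
        have hj1 := pyIdx?_lt h1
        have hlu' : lu = l[j1] := by
          rw [hlu, pvGet_some l p.1 0 h1, List.getD_eq_getElem _ _ hj1]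
        rw [pvSet_some l p.1 m h1]
        set l1 := l.set j1 m with hl1
        have hlen1 : l1.length = l.length := by simp [hl1]
        have hsum1 : pvSumNat l1 + l[j1].toNat = pvSumNat l + m.toNat := pvSumNat_set l j1 m hj1
        have hnn1 : ∀ x ∈ l1, 0 ≤ x := nonneg_set h hm0
        have hidx2 : PySem.List.pyIdx? l1.length p.2 = PySem.List.pyIdx? l.length p.2 := by
          rw [hlen1]
        cases h2 : PySem.List.pyIdx? l.length p.2 with
        | none =>
            have hlv' : lv = 0 := by rw [hlv, pvGet_none l p.2 0 h2]
            have hm' : m = 0 := by omega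
            have hlum : lu ≠ m := by
              rcases hcond with hc | hc
              · exact hc
              · exact ((hc (by omega)).elim)
            rw [pvSet_none l1 p.2 m (by rw [hidx2]; exact h2)]
            exact ⟨hnn1, by omega, fun _ => Or.inr (by omega)⟩
        | some j2 =>
            have hj2 := pyIdx?_lt h2
            have hlv' : lv = l[j2] := by
              rw [hlv, pvGet_some l p.2 0 h2, List.getD_eq_getElem _ _ hj2]
            rw [pvSet_some l1 p.2 m (by rw [hidx2]; exact h2)]
            have hj2' : j2 < l1.length := by omega
            have hsum2 : pvSumNat (l1.set j2 m) + l1[j2].toNat = pvSumNat l1 + m.toNat :=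
              pvSumNat_set l1 j2 m hj2'
            by_cases hjj : j2 = j1
            · subst hjj
              have hval : l1[j2] = m := by simp [hl1, List.getElem_set_self]
              rw [hval] at hsum2
              have hlul : lu = lv := by omega
              have hstrict : m < lu := by
                rcases hcond with hc | hc
                · omega
                · omega
              exact ⟨nonneg_set hnn1 hm0, by omega, fun _ => Or.inr (by omega)⟩
            · have hval : l1[j2] = l[j2] := by
                simp [hl1, List.getElem_set_ne (by omega : j1 ≠ j2)]
              rw [hval] at hsum2
              refine ⟨nonneg_set hnn1 hm0, by omega, fun _ => Or.inr ?_⟩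
              rcases hcond with hc | hc
              · omega
              · omega
  · rw [if_neg hcond]
    exact ⟨h, le_refl _, fun hb => Or.inl hb⟩

lemma bPass_facts (pairs : List (Int × Int)) : ∀ (l : List Int) (b : Bool), (∀ x ∈ l, 0 ≤ x) →
    (∀ x ∈ (pairs.foldl bPassStep (l, b)).1, 0 ≤ x) ∧
    pvSumNat (pairs.foldl bPassStep (l, b)).1 ≤ pvSumNat l ∧
    ((pairs.foldl bPassStep (l, b)).2 = true → b = true ∨
      pvSumNat (pairs.foldl bPassStep (l, b)).1 < pvSumNat l) := by
  induction pairs with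
  | nil => intro l b h; exact ⟨h, le_refl _, fun hb => Or.inl hb⟩
  | cons p ps ih =>
      intro l b h
      rw [List.foldl_cons]
      obtain ⟨hs1, hs2, hs3⟩ := bPassStep_facts l b p h
      have heta : bPassStep (l, b) p = ((bPassStep (l, b) p).1, (bPassStep (l, b) p).2) := rfl
      rw [heta]
      obtain ⟨hi1, hi2, hi3⟩ := ih (bPassStep (l, b) p).1 (bPassStep (l, b) p).2 hs1
      refine ⟨hi1, le_trans hi2 hs2, fun hb => ?_⟩
      rcases hi3 hb with hflag | hlt
      · rcases hs3 hflag with hb' | hlt'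
        · exact Or.inl hb'
        · exact Or.inr (by omega)
      · exact Or.inr (by omega)

lemma bPass_nonneg {lab : List Int} (pairs : List (Int × Int))
    (h : ∀ x ∈ lab, 0 ≤ x) : ∀ x ∈ (bPass lab pairs).1, 0 ≤ x :=
  (bPass_facts pairs lab false h).1

lemma bPass_dec {lab : List Int} (pairs : List (Int × Int))
    (h : ∀ x ∈ lab, 0 ≤ x) (hc : (bPass lab pairs).2 = true) :
    pvSumNat (bPass lab pairs).1 < pvSumNat lab := by
  rcases (bPass_facts pairs lab false h).2.2 hc with h1 | h1
  · cases h1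
  · exact h1


lemma pyRange_nonneg (n : Int) : ∀ x ∈ PySem.List.pyRange 0 (n + 1) 1, 0 ≤ x := by
  intro x hx
  have := (PySem.List.mem_pyRange_one).1 hx
  omega


-- ---- spec-level partition machinery ----

-- connectivity generated by a list of (u, v) pairs
inductive pvConn (P : List (Int × Int)) : Int → Int → Prop
  | rel {u v : Int} : (u, v) ∈ P → pvConn P u v
  | refl (x : Int) : pvConn P x x
  | symm {x y : Int} : pvConn P x y → pvConn P y x
  | trans {x y z : Int} : pvConn P x y → pvConn P y z → pvConn P x z

lemma pvConn_nil {x y : Int} : pvConn [] x y ↔ x = y := by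
  constructor
  · intro h
    induction h with
    | rel h => simp at h
    | refl => rfl
    | symm _ ih => omega
    | trans _ _ ih1 ih2 => omega
  · rintro rfl; exact pvConn.refl x

lemma pvConn_mono {P Q : List (Int × Int)} (hPQ : ∀ p ∈ P, p ∈ Q) {x y : Int}
    (h : pvConn P x y) : pvConn Q x y := by
  induction h with
  | rel h => exact pvConn.rel (hPQ _ h)
  | refl x => exact pvConn.refl x
  | symm _ ih => exact ih.symm
  | trans _ _ ih1 ih2 => exact ih1.trans ih2

lemma pvConn_append {P : List (Int × Int)} {u v x y : Int} :
    pvConn (P ++ [(u, v)]) x y ↔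
      pvConn P x y ∨ (pvConn P x u ∧ pvConn P v y) ∨ (pvConn P x v ∧ pvConn P u y) := by
  constructor
  · intro h
    induction h with
    | rel h =>
        rename_i a b
        rcases List.mem_append.1 h with h' | h'
        · exact Or.inl (pvConn.rel h')
        · simp at h'
          obtain ⟨rfl, rfl⟩ := h'
          exact Or.inr (Or.inl ⟨pvConn.refl _, pvConn.refl _⟩)
    | refl x => exact Or.inl (pvConn.refl x)
    | symm _ ih =>
        rcases ih with h1 | ⟨h1, h2⟩ | ⟨h1, h2⟩
        · exact Or.inl h1.symm
        · exact Or.inr (Or.inr ⟨h2.symm, h1.symm⟩)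
        · exact Or.inr (Or.inl ⟨h2.symm, h1.symm⟩)
    | trans _ _ ih1 ih2 =>
        rcases ih1 with h1 | ⟨h1, h2⟩ | ⟨h1, h2⟩ <;>
          rcases ih2 with h3 | ⟨h3, h4⟩ | ⟨h3, h4⟩
        · exact Or.inl (h1.trans h3)
        · exact Or.inr (Or.inl ⟨h1.trans h3, h4⟩)
        · exact Or.inr (Or.inr ⟨h1.trans h3, h4⟩)
        · exact Or.inr (Or.inl ⟨h1, h2.trans h3⟩)
        · exact Or.inr (Or.inl ⟨h1, h4⟩)
        · exact Or.inl (h1.trans h4)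
        · exact Or.inr (Or.inr ⟨h1, h2.trans h3⟩)
        · exact Or.inl (h1.trans h4)
        · exact Or.inr (Or.inr ⟨h1, h4⟩)
  · intro h
    have hP : ∀ a b, pvConn P a b → pvConn (P ++ [(u, v)]) a b :=
      fun a b hab => pvConn_mono (fun p hp => List.mem_append.2 (Or.inl hp)) hab
    have huv : pvConn (P ++ [(u, v)]) u v := pvConn.rel (by simp)
    rcases h with h1 | ⟨h1, h2⟩ | ⟨h1, h2⟩
    · exact hP _ _ h1
    · exact ((hP _ _ h1).trans huv).trans (hP _ _ h2)
    · exact ((hP _ _ h1).trans huv.symm).trans (hP _ _ h2)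

-- merging the class of v into the class of u, on a labelling function
def pvMerge (L : Int → Int) (u v : Int) : Int → Int := fun x => if L x = L v then L u else L x

lemma pvMerge_self {L : Int → Int} {u v : Int} (h : L u = L v) : pvMerge L u v = L := by
  funext x
  unfold pvMerge
  by_cases hx : L x = L v
  · rw [if_pos hx, h, hx]
  · rw [if_neg hx]

lemma pvMerge_eq_iff {L : Int → Int} {u v x y : Int} :
    pvMerge L u v x = pvMerge L u v y ↔
      (L x = L y ∨ (L x = L u ∧ L v = L y) ∨ (L x = L v ∧ L u = L y)) := by
  unfold pvMerge
  split_ifs with h1 h2 h2 <;> omega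

-- number of distinct labels over the vertices 0..N-1
def pvDC (N : Nat) (L : Int → Int) : Nat :=
  ((Finset.range N).image (fun i : Nat => L (i : Int))).card

lemma pvDC_merge {N : Nat} {L : Int → Int} {u v : Nat} (hu : u < N) (hv : v < N)
    (hne : L u ≠ L v) : pvDC N (pvMerge L (u : Int) (v : Int)) + 1 = pvDC N L := by
  unfold pvDC
  have himg : (Finset.range N).image (fun i : Nat => pvMerge L (u : Int) (v : Int) (i : Int)) =
      ((Finset.range N).image (fun i : Nat => L (i : Int))).erase (L (v : Int)) := by
    ext a
    simp only [Finset.mem_image, Finset.mem_erase, Finset.mem_range]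
    constructor
    · rintro ⟨i, hi, rfl⟩
      unfold pvMerge
      by_cases hx : L (i : Int) = L (v : Int)
      · rw [if_pos hx]
        exact ⟨hne, ⟨u, hu, rfl⟩⟩
      · rw [if_neg hx]
        exact ⟨hx, ⟨i, hi, rfl⟩⟩
    · rintro ⟨ha, ⟨i, hi, rfl⟩⟩
      refine ⟨i, hi, ?_⟩
      unfold pvMerge
      rw [if_neg ha]
  rw [himg]
  have hmem : L (v : Int) ∈ (Finset.range N).image (fun i : Nat => L (i : Int)) := by
    exact Finset.mem_image.2 ⟨v, Finset.mem_range.2 hv, rfl⟩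
  rw [Finset.card_erase_of_mem hmem]
  have : 0 < ((Finset.range N).image (fun i : Nat => L (i : Int))).card :=
    Finset.card_pos.2 ⟨_, hmem⟩
  omega

-- two labellings inducing the same partition on 0..N-1 have equally many labels
lemma pvDC_congr {N : Nat} {f g : Int → Int}
    (h : ∀ i j : Nat, i < N → j < N → (f i = f j ↔ g i = g j)) : pvDC N f = pvDC N g := by
  unfold pvDC
  induction N with
  | zero => simp
  | succ k ih =>
      rw [Finset.range_add_one, Finset.image_insert, Finset.image_insert]
      have hk := ih (fun i j hi hj => h i j (by omega) (by omega))
      by_cases hmem : f (k : Int) ∈ (Finset.range k).image (fun i : Nat => f (i : Int))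
      · obtain ⟨j, hj, hfj⟩ := Finset.mem_image.1 hmem
        have hj' := Finset.mem_range.1 hj
        have hg : g (k : Int) ∈ (Finset.range k).image (fun i : Nat => g (i : Int)) := by
          refine Finset.mem_image.2 ⟨j, hj, ?_⟩
          exact (h j k (by omega) (by omega)).1 hfj
        rw [Finset.insert_eq_self.2 hmem, Finset.insert_eq_self.2 hg]
        exact hk
      · have hg : g (k : Int) ∉ (Finset.range k).image (fun i : Nat => g (i : Int)) := by
          intro hc
          obtain ⟨j, hj, hgj⟩ := Finset.mem_image.1 hc
          exact hmem (Finset.mem_image.2 ⟨j, hj, (h j k (by have := Finset.mem_range.1 hj; omega) (by omega)).2 hgj⟩)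
        rw [Finset.card_insert_of_notMem hmem, Finset.card_insert_of_notMem hg, hk]

-- ---- relating A's union-find states to labelling functions ----
def pvEdgeOK (n : Int) (e : List Int) : Prop :=
  (PySem.List.pyGetD e 0 0 = 1 ∨ PySem.List.pyGetD e 0 0 = 2 ∨ PySem.List.pyGetD e 0 0 = 3) →
    -(n + 1) ≤ PySem.List.pyGetD e 1 0 ∧ PySem.List.pyGetD e 1 0 ≤ n ∧
    -(n + 1) ≤ PySem.List.pyGetD e 2 0 ∧ PySem.List.pyGetD e 2 0 ≤ n

-- a Python index in -(N)..N-1 and the vertex 0..N-1 it denotes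
def pvNorm (N : Nat) (x : Int) : Int := if 0 ≤ x then x else x + N

def pvNrmP (N : Nat) (P : List (Int × Int)) : List (Int × Int) :=
  P.map (fun p => (pvNorm N p.1, pvNorm N p.2))

lemma pvNrmP_append (N : Nat) (P Q : List (Int × Int)) :
    pvNrmP N (P ++ Q) = pvNrmP N P ++ pvNrmP N Q := List.map_append ..

lemma edge_vertices {n : Int} {e : List Int} (N : Nat) (hN : (N : Int) = n + 1)
    (hok : pvEdgeOK n e)
    (hrel : PySem.List.pyGetD e 0 0 = 1 ∨ PySem.List.pyGetD e 0 0 = 2 ∨ PySem.List.pyGetD e 0 0 = 3) :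
    ∃ u v : Nat, u < N ∧ v < N ∧
      (PySem.List.pyGetD e 1 0 = (u : Int) ∨ PySem.List.pyGetD e 1 0 = (u : Int) - (N : Int)) ∧
      (PySem.List.pyGetD e 2 0 = (v : Int) ∨ PySem.List.pyGetD e 2 0 = (v : Int) - (N : Int)) ∧
      pvNorm N (PySem.List.pyGetD e 1 0) = (u : Int) ∧
      pvNorm N (PySem.List.pyGetD e 2 0) = (v : Int) := by
  obtain ⟨h1, h2, h3, h4⟩ := hok hrel
  refine ⟨(pvNorm N (PySem.List.pyGetD e 1 0)).toNat, (pvNorm N (PySem.List.pyGetD e 2 0)).toNat,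
    ?_, ?_, ?_, ?_, ?_, ?_⟩ <;> unfold pvNorm <;> split_ifs <;> omega

-- ---- negative in-range indices denote the same cells as their wraparounds ----
lemma pyGetD_norm {l : List Int} {N u : Nat} (hlen : l.length = N) (hu : u < N)
    {x : Int} (hx : x = (u : Int) ∨ x = (u : Int) - (N : Int)) (d : Int) :
    PySem.List.pyGetD l x d = l.getD u d := by
  rcases hx with hx | hx
  · rw [hx, PySem.List.pyGetD_natCast]
  · have hidx : PySem.List.pyIdx? l.length x = some u := by
      unfold PySem.List.pyIdx?
      rw [hlen]
      split_ifs with h1 h2 h2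
      · omega
      · omega
      · congr 1
        omega
      · omega
    rw [pvGet_some l x d hidx]

lemma pySetD_norm {l : List Int} {N u : Nat} (hlen : l.length = N) (hu : u < N)
    {x : Int} (hx : x = (u : Int) ∨ x = (u : Int) - (N : Int)) (v : Int) :
    PySem.List.pySetD l x v = l.set u v := by
  rcases hx with hx | hx
  · rw [hx, PySem.List.pySetD_natCast]
  · have hidx : PySem.List.pyIdx? l.length x = some u := by
      unfold PySem.List.pyIdx?
      rw [hlen]
      split_ifs with h1 h2 h2
      · omega
      · omega
      · congr 1
        omega
      · omega
    exact pvSet_some l x v hidx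

lemma ufFind_length : ∀ (fuel : Nat) (p : List Int) (u : Int),
    (ufFind p u fuel).1.length = p.length := by
  intro fuel
  induction fuel with
  | zero => intro p u; rfl
  | succ fuel ih =>
      intro p u
      rw [ufFind]
      dsimp only
      split_ifs with h
      · rw [PySem.List.length_pySetD, ih]
      · rfl

lemma ufFind_self {p : List Int} {u : Nat} (hfix : p.getD u 0 = (u : Int)) :
    ∀ fuel, ufFind p (u : Int) fuel = (p, (u : Int)) := by
  intro fuel
  cases fuel with
  | zero => rfl
  | succ fuel =>
      rw [ufFind]
      have : PySem.List.pyGetD p (u : Int) 0 = (u : Int) := by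
        rw [PySem.List.pyGetD_natCast, hfix]
      simp [this]

lemma ufFind_norm {N : Nat} {p : List Int} (hI : pvInv N p) {u : Nat} (hu : u < N)
    {x : Int} (hx : x = (u : Int) - (N : Int)) :
    ∀ fuel, 1 ≤ fuel → ufFind p x fuel = ufFind p (u : Int) fuel := by
  intro fuel hfuel
  obtain ⟨f, rfl⟩ : ∃ f, fuel = f + 1 := ⟨fuel - 1, by omega⟩
  have hlen : p.length = N := hI.1
  have hxneg : x < 0 := by omega
  have hget : PySem.List.pyGetD p x 0 = p.getD u 0 :=
    pyGetD_norm hlen hu (Or.inr hx) 0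
  have hval0 : 0 ≤ p.getD u 0 := (hI.2.1 u hu).1
  by_cases hself : p.getD u 0 = (u : Int)
  · -- u is its own parent: both sides return (p, u)
    rw [ufFind_self hself (f + 1)]
    rw [ufFind]
    dsimp only
    rw [hget, hself, if_pos (by omega : (u : Int) ≠ x)]
    rw [ufFind_self hself f]
    dsimp only
    rw [pySetD_norm hlen hu (Or.inr hx) (u : Int)]
    rw [set_self_eq (by omega) hself]
  · -- both sides recurse on the same parent and write the same cell
    conv_lhs => rw [ufFind]
    conv_rhs => rw [ufFind]
    dsimp only
    have hgu : PySem.List.pyGetD p (u : Int) 0 = p.getD u 0 := PySem.List.pyGetD_natCast ..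
    rw [hget, hgu, if_pos (by omega : p.getD u 0 ≠ x), if_pos (by
      intro hc
      exact hself hc)]
    have hlenr : (ufFind p (p.getD u 0) f).1.length = N := by
      rw [ufFind_length, hlen]
    rw [pySetD_norm hlenr hu (Or.inr hx) _, PySem.List.pySetD_natCast]

lemma ufUnion_norm {N : Nat} {p : List Int} (hI : pvInv N p) (rk : List Int)
    {u v : Nat} (hu : u < N) (hv : v < N) {x y : Int}
    (hx : x = (u : Int) ∨ x = (u : Int) - (N : Int))
    (hy : y = (v : Int) ∨ y = (v : Int) - (N : Int)) :
    ufUnion p rk x y = ufUnion p rk (u : Int) (v : Int) := by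
  have hN1 : 1 ≤ p.length := by
    have := hI.1
    omega
  have hfindx : ufFind p x p.length = ufFind p (u : Int) p.length := by
    rcases hx with hx | hx
    · rw [hx]
    · exact ufFind_norm hI hu hx p.length hN1
  have hIu := (ufFind_run (p := p) hI hu).2.1
  have hlenu : (ufFind p (u : Int) p.length).1.length = N := hIu.1
  have hfindy : ufFind (ufFind p (u : Int) p.length).1 y (ufFind p (u : Int) p.length).1.length =
      ufFind (ufFind p (u : Int) p.length).1 (v : Int) (ufFind p (u : Int) p.length).1.length := by
    rcases hy with hy | hy
    · rw [hy]
    · exact ufFind_norm hIu hv hy _ (by omega)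
  simp only [ufUnion]
  rw [hfindx, hfindy]

def pvRelF (N : Nat) (p : List Int) (L : Int → Int) : Prop :=
  pvInv N p ∧ ∀ u v : Nat, u < N → v < N →
    (pvRoot p u = pvRoot p v ↔ L (u : Int) = L (v : Int))

lemma union_matchF {N : Nat} {p : List Int} {L : Int → Int} (rk : List Int) {u v : Nat}
    (hR : pvRelF N p L) (hu : u < N) (hv : v < N) :
    pvRelF N (ufUnion p rk (u : Int) (v : Int)).1 (pvMerge L (u : Int) (v : Int)) ∧
    ((ufUnion p rk (u : Int) (v : Int)).2.2 = true ↔ L (u : Int) ≠ L (v : Int)) := by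
  obtain ⟨hI, hiff⟩ := hR
  obtain ⟨hUI, hUb, hUeq, hUne⟩ := ufUnion_spec rk hI hu hv
  by_cases hrr : pvRoot p u = pvRoot p v
  · have hLL : L (u : Int) = L (v : Int) := (hiff u v hu hv).1 hrr
    have hMl : pvMerge L (u : Int) (v : Int) = L := pvMerge_self hLL
    rw [hMl]
    refine ⟨⟨hUI, fun x y hx hy => ?_⟩, ?_⟩
    · rw [hUeq hrr x hx, hUeq hrr y hy]; exact hiff x y hx hy
    · rw [hUb]; constructor
      · intro h; exact absurd hrr h
      · intro h; exact absurd hLL h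
  · have hLL : L (u : Int) ≠ L (v : Int) := fun h => hrr ((hiff u v hu hv).2 h)
    obtain ⟨R, hRor, hRf⟩ := hUne hrr
    refine ⟨⟨hUI, fun x y hx hy => ?_⟩, by rw [hUb]; exact ⟨fun _ => hLL, fun _ => hrr⟩⟩
    rw [hRf x hx, hRf y hy, pvMerge_eq_iff]
    by_cases hQx : pvRoot p x = pvRoot p u ∨ pvRoot p x = pvRoot p v <;>
      by_cases hQy : pvRoot p y = pvRoot p u ∨ pvRoot p y = pvRoot p v
    · rw [if_pos hQx, if_pos hQy]
      constructor
      · intro _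
        rcases hQx with h1 | h1 <;> rcases hQy with h2 | h2
        · exact Or.inl ((hiff x y hx hy).1 (h1.trans h2.symm))
        · exact Or.inr (Or.inl ⟨(hiff x u hx hu).1 h1, (hiff v y hv hy).1 (h2.symm ▸ rfl : pvRoot p v = pvRoot p y)⟩)
        · exact Or.inr (Or.inr ⟨(hiff x v hx hv).1 h1, (hiff u y hu hy).1 (h2.symm ▸ rfl : pvRoot p u = pvRoot p y)⟩)
        · exact Or.inl ((hiff x y hx hy).1 (h1.trans h2.symm))
      · intro _; rfl
    · rw [if_pos hQx, if_neg hQy]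
      have hyu : L (y : Int) ≠ L (u : Int) := fun h => hQy (Or.inl ((hiff y u hy hu).2 h))
      have hyv : L (y : Int) ≠ L (v : Int) := fun h => hQy (Or.inr ((hiff y v hy hv).2 h))
      constructor
      · intro hRy
        exfalso
        rcases hRor with h | h
        · exact hQy (Or.inl (by rw [← hRy, h]))
        · exact hQy (Or.inr (by rw [← hRy, h]))
      · intro h
        exfalso
        rcases hQx with h1 | h1
        · have hxu := (hiff x u hx hu).1 h1
          rcases h with h2 | ⟨h2, h3⟩ | ⟨h2, h3⟩
          · exact hyu (h2.symm.trans hxu)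
          · exact hyv h3.symm
          · exact hLL (hxu.symm.trans h2)
        · have hxv := (hiff x v hx hv).1 h1
          rcases h with h2 | ⟨h2, h3⟩ | ⟨h2, h3⟩
          · exact hyv (h2.symm.trans hxv)
          · exact hLL (h2.symm.trans hxv)
          · exact hyu h3.symm
    · rw [if_neg hQx, if_pos hQy]
      have hxu : L (x : Int) ≠ L (u : Int) := fun h => hQx (Or.inl ((hiff x u hx hu).2 h))
      have hxv : L (x : Int) ≠ L (v : Int) := fun h => hQx (Or.inr ((hiff x v hx hv).2 h))
      constructor
      · intro hRy
        exfalso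
        rcases hRor with h | h
        · exact hQx (Or.inl (by rw [hRy, h]))
        · exact hQx (Or.inr (by rw [hRy, h]))
      · intro h
        exfalso
        rcases h with h2 | ⟨h2, h3⟩ | ⟨h2, h3⟩
        · rcases hQy with h1 | h1
          · exact hxu (h2.trans ((hiff y u hy hu).1 h1))
          · exact hxv (h2.trans ((hiff y v hy hv).1 h1))
        · exact hxu h2
        · exact hxv h2
    · rw [if_neg hQx, if_neg hQy]
      have hxu : L (x : Int) ≠ L (u : Int) := fun h => hQx (Or.inl ((hiff x u hx hu).2 h))
      have hxv : L (x : Int) ≠ L (v : Int) := fun h => hQx (Or.inr ((hiff x v hx hv).2 h))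
      constructor
      · intro h; exact Or.inl ((hiff x y hx hy).1 h)
      · intro h
        rcases h with h2 | ⟨h2, h3⟩ | ⟨h2, h3⟩
        · exact (hiff x y hx hy).2 h2
        · exact absurd h2 hxu
        · exact absurd h2 hxv

def pvConnIff (N : Nat) (L : Int → Int) (P : List (Int × Int)) : Prop :=
  ∀ u v : Nat, u < N → v < N → (L (u : Int) = L (v : Int) ↔ pvConn P (u : Int) (v : Int))

lemma connIff_step {N : Nat} {L : Int → Int} {P : List (Int × Int)} {u v : Nat}
    (hu : u < N) (hv : v < N) (hC : pvConnIff N L P) :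
    pvConnIff N (pvMerge L (u : Int) (v : Int)) (P ++ [((u : Int), (v : Int))]) := by
  intro x y hx hy
  rw [pvMerge_eq_iff, pvConn_append]
  constructor
  · intro h
    rcases h with h | ⟨h1, h2⟩ | ⟨h1, h2⟩
    · exact Or.inl ((hC x y hx hy).1 h)
    · exact Or.inr (Or.inl ⟨(hC x u hx hu).1 h1, (hC v y hv hy).1 h2⟩)
    · exact Or.inr (Or.inr ⟨(hC x v hx hv).1 h1, (hC u y hu hy).1 h2⟩)
  · intro h
    rcases h with h | ⟨h1, h2⟩ | ⟨h1, h2⟩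
    · exact Or.inl ((hC x y hx hy).2 h)
    · exact Or.inr (Or.inl ⟨(hC x u hx hu).2 h1, (hC v y hv hy).2 h2⟩)
    · exact Or.inr (Or.inr ⟨(hC x v hx hv).2 h1, (hC u y hu hy).2 h2⟩)

-- the (u, v) pairs of the type-t edges, in order
def pvEx (t : Int) (edges : List (List Int)) : List (Int × Int) :=
  edges.filterMap (fun e =>
    if PySem.List.pyGetD e 0 0 = t then
      some (PySem.List.pyGetD e 1 0, PySem.List.pyGetD e 2 0) else none)

lemma bSplit_acc : ∀ (edges : List (List Int)) (a b c : List (Int × Int)),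
    edges.foldl bSplitStep (a, b, c) =
      (a ++ pvEx 1 edges, b ++ pvEx 2 edges, c ++ pvEx 3 edges) := by
  intro edges
  induction edges with
  | nil => intro a b c; simp [pvEx]
  | cons e rest ih =>
      intro a b c
      rw [List.foldl_cons]
      by_cases h1 : PySem.List.pyGetD e 0 0 = 1
      · have hs : bSplitStep (a, b, c) e =
            (a ++ [(PySem.List.pyGetD e 1 0, PySem.List.pyGetD e 2 0)], b, c) := by
          simp [bSplitStep, h1]
        rw [hs, ih]
        simp [pvEx, h1, List.filterMap_cons]
      · by_cases h2 : PySem.List.pyGetD e 0 0 = 2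
        · have hs : bSplitStep (a, b, c) e =
              (a, b ++ [(PySem.List.pyGetD e 1 0, PySem.List.pyGetD e 2 0)], c) := by
            simp [bSplitStep, h1, h2]
          rw [hs, ih]
          simp [pvEx, h1, h2, List.filterMap_cons]
        · by_cases h3 : PySem.List.pyGetD e 0 0 = 3
          · have hs : bSplitStep (a, b, c) e =
                (a, b, c ++ [(PySem.List.pyGetD e 1 0, PySem.List.pyGetD e 2 0)]) := by
              simp [bSplitStep, h1, h2, h3]
            rw [hs, ih]
            simp [pvEx, h1, h2, h3, List.filterMap_cons]
          · have hs : bSplitStep (a, b, c) e = (a, b, c) := by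
              simp [bSplitStep, h1, h2, h3]
            rw [hs, ih]
            simp [pvEx, h1, h2, h3, List.filterMap_cons]

-- ---- folding A's three loops against evolving labellings ----
def InvA1 (N : Nat) (s : (List Int × List Int) × (List Int × List Int) × (List Int × List Int) × Int)
    (L : Int → Int) (P : List (Int × Int)) : Prop :=
  pvRelF N s.1.1 L ∧ pvRelF N s.2.1.1 L ∧ pvRelF N s.2.2.1.1 L ∧ pvConnIff N L P ∧
  s.2.2.2 = (P.length : Int) - ((N : Int) - (pvDC N L : Int))

lemma fold1F {N : Nat} {n : Int} (hN : (N : Int) = n + 1) :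
    ∀ (edges : List (List Int)) s L P, (∀ e ∈ edges, pvEdgeOK n e) → InvA1 N s L P →
    ∃ L', InvA1 N (edges.foldl phase1Step s) L' (P ++ pvNrmP N (pvEx 3 edges)) := by
  intro edges
  induction edges with
  | nil => intro s L P _ hI; exact ⟨L, by simpa [pvEx, pvNrmP] using hI⟩
  | cons e rest ih =>
      intro s L P hok hI
      rw [List.foldl_cons]
      by_cases h3 : PySem.List.pyGetD e 0 0 = 3
      · obtain ⟨u, v, hu, hv, hx1, hx2, hn1, hn2⟩ :=
          edge_vertices N hN (hok e List.mem_cons_self) (Or.inr (Or.inr h3))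
        obtain ⟨hRc, hRa, hRb, hC, hcnt⟩ := hI
        have hEx : pvNrmP N (pvEx 3 (e :: rest)) =
            ((u : Int), (v : Int)) :: pvNrmP N (pvEx 3 rest) := by
          simp [pvEx, pvNrmP, List.filterMap_cons, h3, hn1, hn2]
        have hCompat : P ++ pvNrmP N (pvEx 3 (e :: rest)) =
            (P ++ [((u : Int), (v : Int))]) ++ pvNrmP N (pvEx 3 rest) := by
          rw [hEx, List.append_assoc]
          rfl
        rw [hCompat]
        have hUNc : ufUnion s.1.1 s.1.2 (PySem.List.pyGetD e 1 0) (PySem.List.pyGetD e 2 0) =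
            ufUnion s.1.1 s.1.2 (u : Int) (v : Int) := ufUnion_norm hRc.1 s.1.2 hu hv hx1 hx2
        have hUc := union_matchF s.1.2 hRc hu hv
        by_cases hLuv : L (u : Int) = L (v : Int)
        · -- redundant type-3 edge: counter += 1, alice and bob untouched
          have hbf : (ufUnion s.1.1 s.1.2 (u : Int) (v : Int)).2.2 = false := by
            rcases Bool.eq_false_or_eq_true (ufUnion s.1.1 s.1.2 (u : Int) (v : Int)).2.2 with h | h
            · exact absurd hLuv (hUc.2.1 h)
            · exact h
          have hstepA : phase1Step s e =
              (((ufUnion s.1.1 s.1.2 (u : Int) (v : Int)).1,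
                (ufUnion s.1.1 s.1.2 (u : Int) (v : Int)).2.1),
               s.2.1, s.2.2.1, s.2.2.2 + 1) := by
            simp only [phase1Step, h3, if_pos, hUNc, hbf]
          rw [hstepA]
          have hML : pvMerge L (u : Int) (v : Int) = L := pvMerge_self hLuv
          apply ih _ L (P ++ [((u : Int), (v : Int))])
            (fun e' he' => hok e' (List.mem_cons_of_mem e he'))
          refine ⟨by rw [← hML]; exact hUc.1, hRa, hRb, ?_, ?_⟩
          · have := connIff_step hu hv hC
            rwa [hML] at this
          · simp only [List.length_append, List.length_cons, List.length_nil]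
            push_cast
            omega
        · -- merging type-3 edge: all three union-finds advance to pvMerge L u v
          have hbt : (ufUnion s.1.1 s.1.2 (u : Int) (v : Int)).2.2 = true := hUc.2.2 hLuv
          have hUNa : ufUnion s.2.1.1 s.2.1.2 (PySem.List.pyGetD e 1 0) (PySem.List.pyGetD e 2 0) =
              ufUnion s.2.1.1 s.2.1.2 (u : Int) (v : Int) :=
            ufUnion_norm hRa.1 s.2.1.2 hu hv hx1 hx2
          have hUNb : ufUnion s.2.2.1.1 s.2.2.1.2 (PySem.List.pyGetD e 1 0) (PySem.List.pyGetD e 2 0) =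
              ufUnion s.2.2.1.1 s.2.2.1.2 (u : Int) (v : Int) :=
            ufUnion_norm hRb.1 s.2.2.1.2 hu hv hx1 hx2
          have hstepA : phase1Step s e =
              (((ufUnion s.1.1 s.1.2 (u : Int) (v : Int)).1,
                (ufUnion s.1.1 s.1.2 (u : Int) (v : Int)).2.1),
               ((ufUnion s.2.1.1 s.2.1.2 (u : Int) (v : Int)).1,
                (ufUnion s.2.1.1 s.2.1.2 (u : Int) (v : Int)).2.1),
               ((ufUnion s.2.2.1.1 s.2.2.1.2 (u : Int) (v : Int)).1,
                (ufUnion s.2.2.1.1 s.2.2.1.2 (u : Int) (v : Int)).2.1),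
               s.2.2.2) := by
            simp only [phase1Step, h3, if_pos, hUNc, hUNa, hUNb, hbt]
            simp
          rw [hstepA]
          have hUa := union_matchF s.2.1.2 hRa hu hv
          have hUb := union_matchF s.2.2.1.2 hRb hu hv
          have hdc := pvDC_merge hu hv hLuv
          apply ih _ (pvMerge L (u : Int) (v : Int)) (P ++ [((u : Int), (v : Int))])
            (fun e' he' => hok e' (List.mem_cons_of_mem e he'))
          refine ⟨hUc.1, hUa.1, hUb.1, connIff_step hu hv hC, ?_⟩
          simp only [List.length_append, List.length_cons, List.length_nil]
          push_cast
          omega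
      · have hstepA : phase1Step s e = s := by simp [phase1Step, h3]
        have hEx : pvNrmP N (pvEx 3 (e :: rest)) = pvNrmP N (pvEx 3 rest) := by
          simp [pvEx, pvNrmP, List.filterMap_cons, h3]
        rw [hstepA, hEx]
        exact ih _ L P (fun e' he' => hok e' (List.mem_cons_of_mem e he')) hI

lemma fold2F {N : Nat} {n : Int} (hN : (N : Int) = n + 1) (t : Int) (ht : t = 1 ∨ t = 2) :
    ∀ (edges : List (List Int)) (s : (List Int × List Int) × Int) L P,
    (∀ e ∈ edges, pvEdgeOK n e) → pvRelF N s.1.1 L → pvConnIff N L P →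
    ∃ L', pvRelF N (edges.foldl (typeStep t) s).1.1 L' ∧
      pvConnIff N L' (P ++ pvNrmP N (pvEx t edges)) ∧
      (edges.foldl (typeStep t) s).2 =
        s.2 + ((pvEx t edges).length : Int) - ((pvDC N L : Int) - (pvDC N L' : Int)) := by
  intro edges
  induction edges with
  | nil =>
      intro s L P _ hR hC
      exact ⟨L, hR, by simpa [pvEx, pvNrmP] using hC, by simp [pvEx]⟩
  | cons e rest ih =>
      intro s L P hok hR hC
      rw [List.foldl_cons]
      by_cases hT : PySem.List.pyGetD e 0 0 = t
      · obtain ⟨u, v, hu, hv, hx1, hx2, hn1, hn2⟩ :=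
          edge_vertices N hN (hok e List.mem_cons_self)
            (by rcases ht with h | h <;> [exact Or.inl (hT.trans h); exact Or.inr (Or.inl (hT.trans h))])
        have hEx : pvNrmP N (pvEx t (e :: rest)) =
            ((u : Int), (v : Int)) :: pvNrmP N (pvEx t rest) := by
          simp [pvEx, pvNrmP, List.filterMap_cons, hT, hn1, hn2]
        have hExL : (pvEx t (e :: rest)).length = (pvEx t rest).length + 1 := by
          simp [pvEx, List.filterMap_cons, hT]
        have hUN : ufUnion s.1.1 s.1.2 (PySem.List.pyGetD e 1 0) (PySem.List.pyGetD e 2 0) =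
            ufUnion s.1.1 s.1.2 (u : Int) (v : Int) := ufUnion_norm hR.1 s.1.2 hu hv hx1 hx2
        have hU := union_matchF s.1.2 hR hu hv
        by_cases hLuv : L (u : Int) = L (v : Int)
        · have hbf : (ufUnion s.1.1 s.1.2 (u : Int) (v : Int)).2.2 = false := by
            rcases Bool.eq_false_or_eq_true (ufUnion s.1.1 s.1.2 (u : Int) (v : Int)).2.2 with h | h
            · exact absurd hLuv (hU.2.1 h)
            · exact h
          have hstepA : typeStep t s e =
              (((ufUnion s.1.1 s.1.2 (u : Int) (v : Int)).1,
                (ufUnion s.1.1 s.1.2 (u : Int) (v : Int)).2.1), s.2 + 1) := by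
            simp only [typeStep, hT, if_pos, hUN, hbf]
            try simp
          rw [hstepA]
          have hML : pvMerge L (u : Int) (v : Int) = L := pvMerge_self hLuv
          obtain ⟨L', hR', hC', hcnt'⟩ := ih (((ufUnion s.1.1 s.1.2 (u : Int) (v : Int)).1,
              (ufUnion s.1.1 s.1.2 (u : Int) (v : Int)).2.1), s.2 + 1) L
              (P ++ [((u : Int), (v : Int))])
              (fun e' he' => hok e' (List.mem_cons_of_mem e he'))
              (by rw [← hML]; exact hU.1)
              (by have := connIff_step hu hv hC; rwa [hML] at this)
          refine ⟨L', hR', ?_, ?_⟩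
          · have hassoc : (P ++ [((u : Int), (v : Int))]) ++ pvNrmP N (pvEx t rest) =
                P ++ ((u : Int), (v : Int)) :: pvNrmP N (pvEx t rest) := by simp
            rw [hEx, ← hassoc]
            exact hC'
          · rw [hExL]
            push_cast at hcnt' ⊢
            omega
        · have hbt : (ufUnion s.1.1 s.1.2 (u : Int) (v : Int)).2.2 = true := hU.2.2 hLuv
          have hstepA : typeStep t s e =
              (((ufUnion s.1.1 s.1.2 (u : Int) (v : Int)).1,
                (ufUnion s.1.1 s.1.2 (u : Int) (v : Int)).2.1), s.2) := by
            simp only [typeStep, hT, if_pos, hUN, hbt]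
            try simp
          rw [hstepA]
          have hdc := pvDC_merge hu hv hLuv
          obtain ⟨L', hR', hC', hcnt'⟩ := ih (((ufUnion s.1.1 s.1.2 (u : Int) (v : Int)).1,
              (ufUnion s.1.1 s.1.2 (u : Int) (v : Int)).2.1), s.2)
              (pvMerge L (u : Int) (v : Int)) (P ++ [((u : Int), (v : Int))])
              (fun e' he' => hok e' (List.mem_cons_of_mem e he'))
              hU.1 (connIff_step hu hv hC)
          refine ⟨L', hR', ?_, ?_⟩
          · have hassoc : (P ++ [((u : Int), (v : Int))]) ++ pvNrmP N (pvEx t rest) =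
                P ++ ((u : Int), (v : Int)) :: pvNrmP N (pvEx t rest) := by simp
            rw [hEx, ← hassoc]
            exact hC'
          · rw [hExL]
            push_cast at hcnt' ⊢
            omega
      · have hstepA : typeStep t s e = s := by simp [typeStep, hT]
        have hEx : pvNrmP N (pvEx t (e :: rest)) = pvNrmP N (pvEx t rest) := by
          simp [pvEx, pvNrmP, List.filterMap_cons, hT]
        have hExL : (pvEx t (e :: rest)).length = (pvEx t rest).length := by
          simp [pvEx, List.filterMap_cons, hT]
        rw [hstepA, hEx, hExL]
        exact ih s L P (fun e' he' => hok e' (List.mem_cons_of_mem e he')) hR hC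

-- ---- B's propagation loop computes the connectivity partition ----
lemma getD_set (l : List Int) (j k : Nat) (a : Int) (hj : j < l.length) :
    (l.set j a).getD k 0 = if k = j then a else l.getD k 0 := by
  by_cases hkj : k = j
  · subst hkj
    simp [List.getD, List.getElem?_set_self hj]
  · simp [List.getD, List.getElem?_set_ne (by omega : j ≠ k), hkj]

lemma foldl_flag_true : ∀ (ps : List (Int × Int)) (l : List Int),
    (ps.foldl bPassStep (l, true)).2 = true := by
  intro ps
  induction ps with
  | nil => intro l; rfl
  | cons p rest ih =>
      intro l
      rw [List.foldl_cons]
      unfold bPassStep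
      by_cases hc : PySem.List.pyGetD l p.1 0 ≠ min (PySem.List.pyGetD l p.1 0) (PySem.List.pyGetD l p.2 0) ∨
          PySem.List.pyGetD l p.2 0 ≠ min (PySem.List.pyGetD l p.1 0) (PySem.List.pyGetD l p.2 0)
      · rw [if_pos hc]; exact ih _
      · rw [if_neg hc]; exact ih _

lemma bPass_false {lab : List Int} {pairs : List (Int × Int)}
    (h : (bPass lab pairs).2 = false) :
    (bPass lab pairs).1 = lab ∧
      ∀ p ∈ pairs, PySem.List.pyGetD lab p.1 0 = PySem.List.pyGetD lab p.2 0 := by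
  unfold bPass at h ⊢
  induction pairs with
  | nil => exact ⟨rfl, by simp⟩
  | cons p rest ih =>
      rw [List.foldl_cons] at h ⊢
      by_cases hc : PySem.List.pyGetD lab p.1 0 ≠ min (PySem.List.pyGetD lab p.1 0) (PySem.List.pyGetD lab p.2 0) ∨
          PySem.List.pyGetD lab p.2 0 ≠ min (PySem.List.pyGetD lab p.1 0) (PySem.List.pyGetD lab p.2 0)
      · exfalso
        have hstep : bPassStep (lab, false) p =
            (PySem.List.pySetD (PySem.List.pySetD lab p.1
              (min (PySem.List.pyGetD lab p.1 0) (PySem.List.pyGetD lab p.2 0))) p.2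
              (min (PySem.List.pyGetD lab p.1 0) (PySem.List.pyGetD lab p.2 0)), true) := by
          unfold bPassStep
          rw [if_pos hc]
        rw [hstep, foldl_flag_true] at h
        exact Bool.true_eq_false.mp h
      · have hstep : bPassStep (lab, false) p = (lab, false) := by
          unfold bPassStep
          rw [if_neg hc]
        rw [hstep] at h ⊢
        obtain ⟨h1, h2⟩ := ih h
        refine ⟨h1, fun q hq => ?_⟩
        rcases List.mem_cons.1 hq with hq | hq
        · subst hq
          omega
        · exact h2 q hq

lemma foldl_pres (Q : List Int → Prop) :
    ∀ (ps : List (Int × Int)) (l : List Int) (b : Bool),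
    (∀ p ∈ ps, ∀ (l' : List Int) (b' : Bool), Q l' → Q (bPassStep (l', b') p).1) →
    Q l → Q (ps.foldl bPassStep (l, b)).1 := by
  intro ps
  induction ps with
  | nil => intro l b _ hQ; exact hQ
  | cons p rest ih =>
      intro l b hstep hQ
      rw [List.foldl_cons]
      have heta : bPassStep (l, b) p = ((bPassStep (l, b) p).1, (bPassStep (l, b) p).2) := rfl
      rw [heta]
      exact ih _ _ (fun q hq => hstep q (List.mem_cons_of_mem p hq))
        (hstep p List.mem_cons_self l b hQ)

-- soundness invariant: each label is a vertex connected to its position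
def QSound (N : Nat) (pairs : List (Int × Int)) (l : List Int) : Prop :=
  l.length = N ∧ ∀ j : Nat, j < N → pvConn (pvNrmP N pairs) (l.getD j 0) (j : Int)

def pvPairsOK (N : Nat) (pairs : List (Int × Int)) : Prop :=
  ∀ p ∈ pairs, ∃ u v : Nat, u < N ∧ v < N ∧
    (p.1 = (u : Int) ∨ p.1 = (u : Int) - (N : Int)) ∧
    (p.2 = (v : Int) ∨ p.2 = (v : Int) - (N : Int)) ∧
    pvNorm N p.1 = (u : Int) ∧ pvNorm N p.2 = (v : Int)

lemma step_sound {N : Nat} {pairs : List (Int × Int)} (hOK : pvPairsOK N pairs)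
    {p : Int × Int} (hp : p ∈ pairs) (l : List Int) (b : Bool) (hQ : QSound N pairs l) :
    QSound N pairs (bPassStep (l, b) p).1 := by
  obtain ⟨u, v, hu, hv, hx1, hx2, hn1, hn2⟩ := hOK p hp
  obtain ⟨hlen, hconn⟩ := hQ
  unfold bPassStep
  by_cases hc : PySem.List.pyGetD l p.1 0 ≠ min (PySem.List.pyGetD l p.1 0) (PySem.List.pyGetD l p.2 0) ∨
      PySem.List.pyGetD l p.2 0 ≠ min (PySem.List.pyGetD l p.1 0) (PySem.List.pyGetD l p.2 0)
  · rw [if_pos hc]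
    dsimp only
    rw [pyGetD_norm hlen hu hx1, pyGetD_norm hlen hv hx2,
      pySetD_norm hlen hu hx1, pySetD_norm (by simpa using hlen) hv hx2]
    set m := min (l.getD u 0) (l.getD v 0) with hm
    have hrel : ((u : Int), (v : Int)) ∈ pvNrmP N pairs := by
      refine List.mem_map.2 ⟨p, hp, ?_⟩
      rw [hn1, hn2]
    have hmConn : pvConn (pvNrmP N pairs) m (u : Int) ∧ pvConn (pvNrmP N pairs) m (v : Int) := by
      have huv : pvConn (pvNrmP N pairs) (u : Int) (v : Int) := pvConn.rel hrel
      have hcu : pvConn (pvNrmP N pairs) (l.getD u 0) (u : Int) := hconn u hu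
      have hcv : pvConn (pvNrmP N pairs) (l.getD v 0) (v : Int) := hconn v hv
      rcases min_choice (l.getD u 0) (l.getD v 0) with hmin | hmin
      · rw [hm, hmin]
        exact ⟨hcu, hcu.trans huv⟩
      · rw [hm, hmin]
        exact ⟨hcv.trans huv.symm, hcv⟩
    refine ⟨by simpa using hlen, fun j hj => ?_⟩
    have hju : u < l.length := by omega
    have hjv : v < (l.set u m).length := by simp; omega
    rw [getD_set _ v j m hjv]
    by_cases hjv' : j = v
    · rw [if_pos hjv']
      subst hjv'
      exact hmConn.2
    · rw [if_neg hjv', getD_set _ u j m hju]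
      by_cases hju' : j = u
      · rw [if_pos hju']
        subst hju'
        exact hmConn.1
      · rw [if_neg hju']
        exact hconn j hj
  · rw [if_neg hc]
    exact ⟨hlen, hconn⟩

lemma conn_labels_eq {pairs : List (Int × Int)} {F : List Int}
    (hfix : ∀ p ∈ pairs, PySem.List.pyGetD F p.1 0 = PySem.List.pyGetD F p.2 0)
    {x y : Int} (h : pvConn pairs x y) :
    PySem.List.pyGetD F x 0 = PySem.List.pyGetD F y 0 := by
  induction h with
  | rel h => exact hfix _ h
  | refl x => rfl
  | symm _ ih => exact ih.symm
  | trans _ _ ih1 ih2 => exact ih1.trans ih2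

lemma bLoopF_spec (pairs : List (Int × Int)) (Q : List Int → Prop)
    (hstep : ∀ (l' : List Int) (b' : Bool), ∀ p ∈ pairs, Q l' → Q (bPassStep (l', b') p).1) :
    ∀ (fuel : Nat) (lab : List Int), (∀ x ∈ lab, 0 ≤ x) → pvSumNat lab < fuel → Q lab →
      Q (bLoopF fuel pairs lab) ∧ ∀ p ∈ pairs,
        PySem.List.pyGetD (bLoopF fuel pairs lab) p.1 0 =
          PySem.List.pyGetD (bLoopF fuel pairs lab) p.2 0 := by
  intro fuel
  induction fuel with
  | zero => intro lab _ hf; omega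
  | succ fuel ih =>
      intro lab hnn hf hQ
      rw [bLoopF]
      by_cases hc : (bPass lab pairs).2 = true
      · rw [if_pos hc]
        exact ih (bPass lab pairs).1 (bPass_nonneg pairs hnn)
          (by have := bPass_dec pairs hnn hc; omega)
          (foldl_pres Q pairs lab false (fun p hp l' b' => hstep l' b' p hp) hQ)
      · rw [if_neg hc]
        have hfx := bPass_false (Bool.not_eq_true _ |>.mp hc)
        rw [hfx.1]
        exact ⟨hQ, hfx.2⟩

lemma bLoop_spec (pairs : List (Int × Int)) (Q : List Int → Prop)
    (hstep : ∀ (l' : List Int) (b' : Bool), ∀ p ∈ pairs, Q l' → Q (bPassStep (l', b') p).1)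
    (lab : List Int) (hnn : ∀ x ∈ lab, 0 ≤ x) (hQ0 : Q lab) :
    Q (bLoop pairs lab) ∧ ∀ p ∈ pairs,
      PySem.List.pyGetD (bLoop pairs lab) p.1 0 =
        PySem.List.pyGetD (bLoop pairs lab) p.2 0 :=
  bLoopF_spec pairs Q hstep (pvSumNat lab + 1) lab hnn (by omega) hQ0

-- ---- counting distinct labels and the final connectivity checks ----
lemma ofList_len (xs : List Int) : (PySem.Set.ofList xs).length = xs.toFinset.card := by
  have hnd := PySem.Set.nodup_ofList xs
  have h1 : (PySem.Set.ofList xs).toFinset.card = (PySem.Set.ofList xs).length :=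
    List.toFinset_card_of_nodup hnd
  have h2 : (PySem.Set.ofList xs).toFinset = xs.toFinset := by
    ext a
    rw [List.mem_toFinset, List.mem_toFinset, PySem.Set.mem_ofList]
  rw [← h1, h2]

lemma labels_card {N : Nat} {F : List Int} (hlen : F.length = N) :
    F.toFinset.card = pvDC N (fun x => PySem.List.pyGetD F x 0) := by
  unfold pvDC
  congr 1
  ext a
  rw [List.mem_toFinset, Finset.mem_image]
  constructor
  · intro ha
    obtain ⟨i, hi, hFi⟩ := List.mem_iff_getElem.1 ha
    refine ⟨i, Finset.mem_range.2 (by omega), ?_⟩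
    show PySem.List.pyGetD F (i : Int) 0 = a
    rw [PySem.List.pyGetD_natCast, List.getD_eq_getElem _ _ hi, hFi]
  · rintro ⟨i, hi, rfl⟩
    have hi' : i < F.length := by
      have := Finset.mem_range.1 hi
      omega
    show PySem.List.pyGetD F (i : Int) 0 ∈ F
    rw [PySem.List.pyGetD_natCast, List.getD_eq_getElem _ _ hi']
    exact List.getElem_mem hi'

lemma checkEq {N : Nat} {n : Int} (hN : (N : Int) = n + 1) {p : List Int} {L : Int → Int}
    {F : List Int} {P : List (Int × Int)} (hR : pvRelF N p L) (hCI : pvConnIff N L P)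
    (hFiff : ∀ i j : Nat, i < N → j < N →
      (PySem.List.pyGetD F (i : Int) 0 = PySem.List.pyGetD F (j : Int) 0 ↔
        pvConn P (i : Int) (j : Int))) :
    scanFind p (PySem.List.pyRange 2 (n + 1) 1) =
      (PySem.List.pyRange 2 (n + 1) 1).all
        (fun i => PySem.List.pyGetD F i 0 == PySem.List.pyGetD F 1 0) := by
  by_cases hn2 : n < 2
  · rw [PySem.List.pyRange_one_eq_nil (by omega)]
    rfl
  · have h1N : 1 < N := by omega
    have hbounds : ∀ i ∈ PySem.List.pyRange 2 (n + 1) 1, 0 ≤ i ∧ i < (N : Int) := by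
      intro i hi
      have := PySem.List.mem_pyRange_one.1 hi
      omega
    apply Bool.coe_iff_coe.mp
    rw [scan_spec h1N _ p hR.1 hbounds, List.all_eq_true]
    have hstep : ∀ i, i ∈ PySem.List.pyRange 2 (n + 1) 1 →
        (pvRoot p i.toNat = pvRoot p 1 ↔
          (PySem.List.pyGetD F i 0 == PySem.List.pyGetD F 1 0) = true) := by
      intro i hi
      have hib := PySem.List.mem_pyRange_one.1 hi
      have hiN : i.toNat < N := by omega
      have hcast : ((i.toNat : Nat) : Int) = i := by omega
      have h1c : (((1 : Nat) : Nat) : Int) = (1 : Int) := rfl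
      rw [beq_iff_eq]
      have h1 := hR.2 i.toNat 1 hiN h1N
      have h2 := hCI i.toNat 1 hiN h1N
      have h3 := hFiff i.toNat 1 hiN h1N
      rw [hcast] at h1 h2 h3
      rw [h1, h2, ← h3]
      norm_num
    constructor
    · intro hall i hi
      exact (hstep i hi).1 (hall i hi)
    · intro hall i hi
      exact (hstep i hi).2 (hall i hi)

lemma pvEx_ok {N : Nat} {n : Int} (hN : (N : Int) = n + 1) {edges : List (List Int)}
    (hok : ∀ e ∈ edges, pvEdgeOK n e) (t : Int) (ht : t = 1 ∨ t = 2 ∨ t = 3) :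
    pvPairsOK N (pvEx t edges) := by
  intro p hp
  obtain ⟨e, he, hsome⟩ := List.mem_filterMap.1 hp
  by_cases hT : PySem.List.pyGetD e 0 0 = t
  · rw [if_pos hT] at hsome
    obtain ⟨u, v, hu, hv, hx1, hx2, hn1, hn2⟩ := edge_vertices N hN (hok e he)
      (by rcases ht with h | h | h
          · exact Or.inl (hT.trans h)
          · exact Or.inr (Or.inl (hT.trans h))
          · exact Or.inr (Or.inr (hT.trans h)))
    refine ⟨u, v, hu, hv, ?_, ?_, ?_, ?_⟩ <;>
      rw [← Option.some_inj.1 hsome] <;> assumption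
  · rw [if_neg hT] at hsome
    cases hsome

lemma pvEx_nil {t : Int} {edges : List (List Int)}
    (h : ∀ e ∈ edges, PySem.List.pyGetD e 0 0 ≠ t) : pvEx t edges = [] := by
  unfold pvEx
  rw [List.filterMap_eq_nil_iff]
  intro e he
  rw [if_neg (h e he)]

lemma lab0_getD {n : Int} (hn : 0 ≤ n) {j : Nat} (hj : j < (n + 1).toNat) :
    (PySem.List.pyRange 0 (n + 1) 1).getD j 0 = (j : Int) := by
  have hlen : (PySem.List.pyRange 0 (n + 1) 1).length = (n + 1).toNat := by
    rw [PySem.List.length_pyRange_one]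
    norm_num
  have hjlen : j < (PySem.List.pyRange 0 (n + 1) 1).length := by omega
  rw [List.getD_eq_getElem _ _ hjlen, PySem.List.getElem_pyRange_one 0 (n + 1) j
    (by rw [PySem.List.length_pyRange_one]; omega)]
  simp

lemma bloop_partition {N : Nat} {pairs : List (Int × Int)} (hOK : pvPairsOK N pairs)
    {lab : List Int} (hnn : ∀ x ∈ lab, 0 ≤ x) (hQ0 : QSound N pairs lab) :
    QSound N pairs (bLoop pairs lab) ∧ (∀ i j : Nat, i < N → j < N →
      (PySem.List.pyGetD (bLoop pairs lab) (i : Int) 0 =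
        PySem.List.pyGetD (bLoop pairs lab) (j : Int) 0 ↔
          pvConn (pvNrmP N pairs) (i : Int) (j : Int))) := by
  obtain ⟨hQ, hfix⟩ := bLoop_spec pairs (QSound N pairs)
    (fun l' b' p hp hQ => step_sound hOK hp l' b' hQ) lab hnn hQ0
  refine ⟨hQ, fun i j hi hj => ?_⟩
  set F := bLoop pairs lab with hF
  have hfix' : ∀ q ∈ pvNrmP N pairs, PySem.List.pyGetD F q.1 0 = PySem.List.pyGetD F q.2 0 := by
    intro q hq
    obtain ⟨p, hp, rfl⟩ := List.mem_map.1 hq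
    obtain ⟨u, v, hu, hv, hx1, hx2, hn1, hn2⟩ := hOK p hp
    dsimp only
    rw [hn1, hn2, pyGetD_norm hQ.1 hu (Or.inl rfl), pyGetD_norm hQ.1 hv (Or.inl rfl),
      ← pyGetD_norm hQ.1 hu hx1, ← pyGetD_norm hQ.1 hv hx2]
    exact hfix p hp
  have hgi : PySem.List.pyGetD F (i : Int) 0 = F.getD i 0 := PySem.List.pyGetD_natCast ..
  have hgj : PySem.List.pyGetD F (j : Int) 0 = F.getD j 0 := PySem.List.pyGetD_natCast ..
  constructor
  · intro hEq
    have h1 : pvConn (pvNrmP N pairs) (F.getD i 0) (i : Int) := hQ.2 i hi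
    have h2 : pvConn (pvNrmP N pairs) (F.getD j 0) (j : Int) := hQ.2 j hj
    rw [hgi, hgj] at hEq
    rw [hEq] at h1
    exact h1.symm.trans h2
  · intro hConn
    exact conn_labels_eq hfix' hConn

lemma bloop_count {N : Nat} {pairs : List (Int × Int)} {L : Int → Int}
    {lab : List Int}
    (hlen : (bLoop pairs lab).length = N)
    (hFiff : ∀ i j : Nat, i < N → j < N →
      (PySem.List.pyGetD (bLoop pairs lab) (i : Int) 0 =
        PySem.List.pyGetD (bLoop pairs lab) (j : Int) 0 ↔
          pvConn (pvNrmP N pairs) (i : Int) (j : Int)))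
    (hCI : pvConnIff N L (pvNrmP N pairs)) :
    (PySem.Set.ofList (bLoop pairs lab)).length = pvDC N L := by
  rw [ofList_len, labels_card hlen]
  apply pvDC_congr
  intro i j hi hj
  rw [hFiff i j hi hj]
  exact (hCI i j hi hj).symm

theorem main_equiv : ∀ (n : Int) (edges : List (List Int)),
    Pre_maxNumEdgesToRemove n edges →
    maxNumEdgesToRemove n edges = maxNumEdgesToRemove_alt n edges := by
  intro n edges hPre
  have hts : edges.foldl bSplitStep ([], [], []) = (pvEx 1 edges, pvEx 2 edges, pvEx 3 edges) := by
    simpa using bSplit_acc edges [] [] []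
  by_cases hn : 0 ≤ n
  · set N := (n + 1).toNat with hNd
    have hN : (N : Int) = n + 1 := by omega
    have hok : ∀ e ∈ edges, pvEdgeOK n e := by
      intro e he hrel
      obtain ⟨-, hb⟩ := hPre e he
      obtain ⟨-, h1, h2, h3, h4⟩ := hb hrel
      exact ⟨h1, h2, h3, h4⟩
    unfold maxNumEdgesToRemove maxNumEdgesToRemove_alt
    rw [hts]
    dsimp only
    set p0 := PySem.List.pyRange 0 (n + 1) 1 with hp0
    set r0 := List.replicate (n + 1).toNat (1 : Int) with hr0
    have hInit := init_parent hn
    have hRel0 : pvRelF N p0 (fun x => x) := by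
      refine ⟨hInit.1, fun u v hu hv => ?_⟩
      rw [hInit.2 u hu, hInit.2 v hv]
      show u = v ↔ ((u : Int) = (v : Int))
      exact ⟨fun h' => by exact_mod_cast h', fun h' => by exact_mod_cast h'⟩
    have hC0 : pvConnIff N (fun x => x) [] := by
      intro u v hu hv
      rw [pvConn_nil]
    have hDC0 : pvDC N (fun x => x) = N := by
      show ((Finset.range N).image (fun i : Nat => (i : Int))).card = N
      rw [Finset.card_image_of_injective _ (fun a b hab => by exact_mod_cast hab)]
      exact Finset.card_range N
    have hInvA0 : InvA1 N ((p0, r0), (p0, r0), (p0, r0), 0) (fun x => x) [] := by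
      refine ⟨hRel0, hRel0, hRel0, hC0, ?_⟩
      rw [hDC0]
      simp
    obtain ⟨L3, hInv3⟩ := fold1F hN edges ((p0, r0), (p0, r0), (p0, r0), 0) (fun x => x) [] hok hInvA0
    rw [List.nil_append] at hInv3
    set s1 := edges.foldl phase1Step ((p0, r0), (p0, r0), (p0, r0), (0 : Int)) with hs1
    obtain ⟨hRc3, hRa3, hRb3, hC3, hcnt3⟩ := hInv3
    obtain ⟨LA, hRA, hCA, hcntA⟩ :=
      fold2F hN 1 (Or.inl rfl) edges (s1.2.1, s1.2.2.2) L3 (pvNrmP N (pvEx 3 edges)) hok hRa3 hC3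
    set sa := edges.foldl (typeStep 1) (s1.2.1, s1.2.2.2) with hsa
    obtain ⟨LB, hRB, hCB, hcntB⟩ :=
      fold2F hN 2 (Or.inr rfl) edges (s1.2.2.1, sa.2) L3 (pvNrmP N (pvEx 3 edges)) hok hRb3 hC3
    set sb := edges.foldl (typeStep 2) (s1.2.2.1, sa.2) with hsb
    -- B side: the three fixpoint labellings
    have happ : ∀ P Q, pvPairsOK N P → pvPairsOK N Q → pvPairsOK N (P ++ Q) :=
      fun P Q h1 h2 p hp => (List.mem_append.1 hp).elim (h1 p) (h2 p)
    have hOK3 : pvPairsOK N (pvEx 3 edges) := pvEx_ok hN hok 3 (by tauto)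
    have hOKA : pvPairsOK N (pvEx 3 edges ++ pvEx 1 edges) :=
      happ _ _ hOK3 (pvEx_ok hN hok 1 (by tauto))
    have hOKB : pvPairsOK N (pvEx 3 edges ++ pvEx 2 edges) :=
      happ _ _ hOK3 (pvEx_ok hN hok 2 (by tauto))
    have hQS0 : ∀ P, QSound N P p0 := by
      intro P
      refine ⟨by rw [hp0, PySem.List.length_pyRange_one]; omega, fun j hj => ?_⟩
      rw [hp0, lab0_getD hn hj]
      exact pvConn.refl _
    obtain ⟨hQ3, hFiff3⟩ := bloop_partition hOK3 (pyRange_nonneg n) (hQS0 _)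
    obtain ⟨hQA, hFiffA⟩ := bloop_partition hOKA (pyRange_nonneg n) (hQS0 _)
    obtain ⟨hQB, hFiffB⟩ := bloop_partition hOKB (pyRange_nonneg n) (hQS0 _)
    rw [← pvNrmP_append] at hCA hCB
    have hc3 := bloop_count hQ3.1 hFiff3 hC3
    have hcA := bloop_count hQA.1 hFiffA hCA
    have hcB := bloop_count hQB.1 hFiffB hCB
    -- the two final connectivity checks coincide
    have hchkA := checkEq hN hRA hCA hFiffA
    have hchkB := checkEq hN hRB hCB hFiffB
    -- assemble
    rw [hchkA, hchkB, hc3, hcA, hcB, hQ3.1]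
    by_cases hA : ((PySem.List.pyRange 2 (n + 1) 1).all
          (fun i => PySem.List.pyGetD (bLoop (pvEx 3 edges ++ pvEx 1 edges) p0) i 0 ==
            PySem.List.pyGetD (bLoop (pvEx 3 edges ++ pvEx 1 edges) p0) 1 0) &&
        (PySem.List.pyRange 2 (n + 1) 1).all
          (fun i => PySem.List.pyGetD (bLoop (pvEx 3 edges ++ pvEx 2 edges) p0) i 0 ==
            PySem.List.pyGetD (bLoop (pvEx 3 edges ++ pvEx 2 edges) p0) 1 0)) = true
    · rw [hA]
      simp only [if_true]
      simp only [pvNrmP, List.length_map] at hcnt3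
      push_cast at hcnt3 hcntA hcntB ⊢
      omega
    · rw [Bool.not_eq_true] at hA
      rw [hA]
      simp
  · -- n < 0: under Pre_ no edge is relevant, both sides return 0
    have hirr : ∀ e ∈ edges, ¬ (PySem.List.pyGetD e 0 0 = 1 ∨ PySem.List.pyGetD e 0 0 = 2 ∨
        PySem.List.pyGetD e 0 0 = 3) := by
      intro e he hrel
      obtain ⟨-, hb⟩ := hPre e he
      obtain ⟨-, h1, h2, -⟩ := hb hrel
      omega
    have h1 : ∀ e ∈ edges, ¬ PySem.List.pyGetD e 0 0 = 1 :=
      fun e he hc => hirr e he (Or.inl hc)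
    have h2 : ∀ e ∈ edges, ¬ PySem.List.pyGetD e 0 0 = 2 :=
      fun e he hc => hirr e he (Or.inr (Or.inl hc))
    have h3 : ∀ e ∈ edges, ¬ PySem.List.pyGetD e 0 0 = 3 :=
      fun e he hc => hirr e he (Or.inr (Or.inr hc))
    have hrange2 : PySem.List.pyRange 2 (n + 1) 1 = [] :=
      PySem.List.pyRange_one_eq_nil (by omega)
    have hrange0 : PySem.List.pyRange 0 (n + 1) 1 = [] :=
      PySem.List.pyRange_one_eq_nil (by omega)
    have hEx : ∀ t, t = 1 ∨ t = 2 ∨ t = 3 → pvEx t edges = [] := by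
      intro t ht
      apply pvEx_nil
      intro e he hc
      rcases ht with h | h | h
      · exact h1 e he (by rw [hc, h])
      · exact h2 e he (by rw [hc, h])
      · exact h3 e he (by rw [hc, h])
    have hA1 := foldl_id phase1Step edges
      ((PySem.List.pyRange 0 (n + 1) 1, List.replicate (n + 1).toNat (1 : Int)),
       (PySem.List.pyRange 0 (n + 1) 1, List.replicate (n + 1).toNat (1 : Int)),
       (PySem.List.pyRange 0 (n + 1) 1, List.replicate (n + 1).toNat (1 : Int)), (0 : Int))
      (fun e he s => by simp [phase1Step, h3 e he])
    have hA2 := foldl_id (typeStep 1) edges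
      ((PySem.List.pyRange 0 (n + 1) 1, List.replicate (n + 1).toNat (1 : Int)), (0 : Int))
      (fun e he s => by simp [typeStep, h1 e he])
    have hA3 := foldl_id (typeStep 2) edges
      ((PySem.List.pyRange 0 (n + 1) 1, List.replicate (n + 1).toNat (1 : Int)), (0 : Int))
      (fun e he s => by simp [typeStep, h2 e he])
    have hloopnil : ∀ (lab : List Int), bLoop [] lab = lab := by
      intro lab
      rw [bLoop, bLoopF]
      norm_num [bPass]
    unfold maxNumEdgesToRemove maxNumEdgesToRemove_alt
    rw [hts, hEx 1 (by tauto), hEx 2 (by tauto), hEx 3 (by tauto)]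
    dsimp only
    rw [hA1]
    dsimp only
    rw [hA2]
    dsimp only
    rw [hA3]
    dsimp only
    simp only [List.nil_append]
    rw [hloopnil, hrange2, hrange0]
    simp [scanFind, PySem.Set.ofList]

-- ===== VERDICT (by name: the statement is the Claim_ definition above) =====
theorem maxNumEdgesToRemove_spec : Claim_equal_maxNumEdgesToRemove := by
  intro n edges _hDom hPre
  unfold Spec_maxNumEdgesToRemove
  exact main_equiv n edges hPre
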